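-- pv_equiv track=rewrite | github.com/Jonggil-dev/Algo | 이재진/석유시추.py | solution
-- ===== SOURCE A (Python) =====
-- from collections import deque
--
-- def find(land, n, m, i, j):
--     dij = [[0,1], [1,0], [0,-1], [-1,0]]
--     ans = []
--     q = deque()
--     q.append([i,j])
--     land[i][j] = 0
--
--     while q:
--         cur = q.popleft()
--         ans.append(cur)
--         ci, cj = cur[0], cur[1]
--         for di, dj in dij:
--             ni, nj = ci+di, cj+dj
--             if 0<=ni<n and 0<=nj<m and land[ni][nj] == 1:
--                 q.append([ni,nj])
--                 land[ni][nj] = 0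
--     return ans
--
-- def solution(land):
--     answer = 0
--     n = len(land)
--     m = len(land[0])
--     ls = [0]*m
--     for i in range(n):
--         for j in range(m):
--             if land[i][j] == 1:
--                 ans = find(land,n,m,i,j)
--                 v = [False]*m
--                 for a in ans:
--                     if not v[a[1]]:
--                         v[a[1]] = True
--                         ls[a[1]] += len(ans)
--     answer = max(ls)
--     return answer
-- ===== SOURCE B (Python) =====
-- def solution(land):
--     n = len(land)
--     m = len(land[0])
--     # every oil cell starts as its own class representative
--     label = {}
--     for i in range(n):
--         for j in range(m):
--             if land[i][j] == 1:
--                 label[(i, j)] = (i, j)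
--     # union each oil cell with its right and down oil neighbours by relabelling
--     for (i, j) in list(label):
--         for nb in ((i, j + 1), (i + 1, j)):
--             if nb in label:
--                 a = label[(i, j)]
--                 b = label[nb]
--                 if a != b:
--                     for k in label:
--                         if label[k] == b:
--                             label[k] = a
--     # size of each class, then credit each class's size once per column it spans
--     sizes = {}
--     for r in label.values():
--         sizes[r] = sizes.get(r, 0) + 1
--     totals = [0] * m
--     seen = set()
--     for (i, j), r in label.items():
--         if (r, j) not in seen:
--             seen.add((r, j))
--             totals[j] += sizes[r]
--     return max(totals)
-- ===== Notes on version B (the rewrite author's own statement) =====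
-- stated objective: alternative
-- what changed: Replaces the input-mutating per-seed BFS flood fill (deque, zeroing the grid, per-component boolean column array) with a union-find-style connected-component labelling: every oil cell starts as its own class label, each right/down oil-oil edge merges two classes by relabelling, then class sizes are counted and each class's size is credited once per (class, column) pair; no flood fill and no mutation of the input.
import Mathlib
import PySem

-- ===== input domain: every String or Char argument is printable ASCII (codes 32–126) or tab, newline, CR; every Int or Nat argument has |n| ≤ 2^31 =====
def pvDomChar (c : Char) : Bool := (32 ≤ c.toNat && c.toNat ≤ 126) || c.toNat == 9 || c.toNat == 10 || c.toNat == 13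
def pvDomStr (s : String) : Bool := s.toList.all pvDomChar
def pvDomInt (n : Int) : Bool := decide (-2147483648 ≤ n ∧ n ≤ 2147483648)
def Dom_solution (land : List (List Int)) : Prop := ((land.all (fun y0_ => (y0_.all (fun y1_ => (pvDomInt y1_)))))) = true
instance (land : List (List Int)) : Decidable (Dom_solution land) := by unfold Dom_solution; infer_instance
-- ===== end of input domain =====

-- B replaces A's input-mutating per-seed BFS flood fill by union-find-style labelling: every oil
-- cell starts as its own class label, right/down oil-oil edges merge classes by relabelling, and
-- each class's size is credited once per (class, column) pair; equivalence is about the RETURN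
-- value only (Python A zeroes `land` in place, B does not mutate its argument).

-- ===== PORT A =====

-- shared tiny grid primitives: land[i][j] read, land[i][j] = 0 write, number of 1-cells
-- (the 1-cell count only bounds the loop fuel; each BFS pop either consumes a queued cell
-- or was enqueued by zeroing a distinct 1-cell, so the fuel is never exhausted early)

def pvGet (g : List (List Int)) (i j : Int) : Option Int :=
  (PySem.List.pyGet? g i).bind (fun row => PySem.List.pyGet? row j)

def pvSet0 (g : List (List Int)) (i j : Int) : List (List Int) :=
  g.set i.toNat ((g.getD i.toNat []).set j.toNat 0)

def pvOnes (g : List (List Int)) : Nat :=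
  (g.map (fun row => row.countP (fun v => v == 1))).sum

-- dij = [[0,1],[1,0],[0,-1],[-1,0]]
def pvDij : List (Int × Int) := [(0, 1), (1, 0), (0, -1), (-1, 0)]

-- the inner `for di, dj in dij:` loop of find (appends in-range 1-neighbours, zeroing them)
def pvStepA (n m ci cj : Int) (st : List (List Int) × List (Int × Int)) :
    List (List Int) × List (Int × Int) :=
  pvDij.foldl (fun st d =>
    if 0 ≤ ci + d.1 ∧ ci + d.1 < n ∧ 0 ≤ cj + d.2 ∧ cj + d.2 < m ∧
        pvGet st.1 (ci + d.1) (cj + d.2) = some 1 then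
      (pvSet0 st.1 (ci + d.1) (cj + d.2), st.2 ++ [(ci + d.1, cj + d.2)])
    else st) st

-- `while q:` of find, popping from the FRONT (deque popleft)
def pvFindLoop (n m : Int) : Nat → List (List Int) → List (Int × Int) →
    List (Int × Int) × List (List Int)
  | 0, g, _ => ([], g)
  | _ + 1, g, [] => ([], g)
  | fuel + 1, g, c :: q =>
    let s := pvStepA n m c.1 c.2 (g, q)
    let r := pvFindLoop n m fuel s.1 s.2
    (c :: r.1, r.2)

def pvFind (g : List (List Int)) (n m i j : Int) : List (Int × Int) × List (List Int) :=
  let g1 := pvSet0 g i j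
  pvFindLoop n m (pvOnes g1 + 1) g1 [(i, j)]

-- `v = [False]*m; for a in ans: if not v[a[1]]: v[a[1]] = True; ls[a[1]] += len(ans)`
def pvMarkA (m L : Int) (ans : List (Int × Int)) (ls : List Int) : List Int :=
  (ans.foldl (fun (s : List Bool × List Int) a =>
      if PySem.List.pyGet? s.1 a.2 = some false then
        (PySem.List.pySetD s.1 a.2 true,
         PySem.List.pySetD s.2 a.2 (PySem.List.pyGetD s.2 a.2 0 + L))
      else s)
    (List.replicate m.toNat false, ls)).2

-- the body of the double `for i in range(n): for j in range(m):` scan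
def pvCellA (n m : Int) (st : List (List Int) × List Int) (i j : Int) :
    List (List Int) × List Int :=
  if pvGet st.1 i j = some 1 then
    let r := pvFind st.1 n m i j
    (r.2, pvMarkA m ((r.1.length : Int)) r.1 st.2)
  else st

def solution (land : List (List Int)) : Int :=
  let n : Int := (land.length : Int)
  let m : Int := ((land.headI).length : Int)
  let fin := (PySem.List.pyRange 0 n 1).foldl
    (fun st i => (PySem.List.pyRange 0 m 1).foldl (fun st j => pvCellA n m st i j) st)
    (land, List.replicate m.toNat 0)
  (PySem.List.max? fin.2 (fun x => x)).getD 0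

-- ===== PORT B =====

-- Python's `for k in label: if label[k] == b: label[k] = a` rewrites every key's value in
-- place, in key order; on a dict (distinct keys, each value read and rewritten once) this is
-- exactly a map over the item list (exact).
def pvRelabel (lab : PySem.Dict (Int × Int) (Int × Int)) (b a : Int × Int) :
    PySem.Dict (Int × Int) (Int × Int) :=
  PySem.Dict.mk (lab.items.map (fun kv => if kv.2 == b then (kv.1, a) else kv))

-- `if nb in label: a = label[(i,j)]; b = label[nb]; if a != b: <relabel b-class to a>`
-- (both lookups are of present keys, so the total getD with a dummy default is exact)
def pvUnionNb (lab : PySem.Dict (Int × Int) (Int × Int)) (p nb : Int × Int) :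
    PySem.Dict (Int × Int) (Int × Int) :=
  if lab.contains nb then
    let a := lab.getD p (0, 0)
    let b := lab.getD nb (0, 0)
    if a == b then lab else pvRelabel lab b a
  else lab

def solution_alt (land : List (List Int)) : Int :=
  let n : Int := (land.length : Int)
  let m : Int := ((land.headI).length : Int)
  -- label = {}; every oil cell its own label
  let label0 := (PySem.List.pyRange 0 n 1).foldl (fun d i =>
      (PySem.List.pyRange 0 m 1).foldl (fun d j =>
        if pvGet land i j = some 1 then d.insert (i, j) (i, j) else d) d)
    (PySem.Dict.empty : PySem.Dict (Int × Int) (Int × Int))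
  -- for (i,j) in list(label): union with right and down neighbours
  let label := label0.keys.foldl (fun lab p =>
      [(p.1, p.2 + 1), (p.1 + 1, p.2)].foldl (fun lab nb => pvUnionNb lab p nb) lab) label0
  -- sizes = {}; for r in label.values(): sizes[r] = sizes.get(r, 0) + 1
  let sizes := label.values.foldl (fun d r => d.insert r (d.getD r 0 + 1))
    (PySem.Dict.empty : PySem.Dict (Int × Int) Int)
  -- totals = [0]*m; seen = set(); credit each class once per column
  let fin := label.items.foldl (fun (st : List Int × PySem.Set ((Int × Int) × Int)) kv =>
      if (kv.2, kv.1.2) ∈ st.2 then st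
      else (PySem.List.pySetD st.1 kv.1.2 (PySem.List.pyGetD st.1 kv.1.2 0 + sizes.getD kv.2 0),
            PySem.Set.add st.2 (kv.2, kv.1.2)))
    (List.replicate m.toNat 0, (PySem.Set.empty : PySem.Set ((Int × Int) × Int)))
  (PySem.List.max? fin.1 (fun x => x)).getD 0

-- ===== PRECONDITION & SPEC =====

-- A raises exactly outside this predicate (IndexError on land[0] when land is empty or on a row
-- shorter than the first row, ValueError from max([]) when the first row is empty); on every
-- admitted input A returns normally.
def Pre_solution (land : List (List Int)) : Prop :=
  land ≠ [] ∧ land.headI.length ≠ 0 ∧ ∀ row ∈ land, land.headI.length ≤ row.length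
instance (land : List (List Int)) : Decidable (Pre_solution land) := by
  unfold Pre_solution; infer_instance

def pvWitness_solution : List (List Int) := [[1, 0], [1, 1]]

def Spec_solution (land : List (List Int)) (out : Int) : Prop := out = solution_alt land
instance (land : List (List Int)) (out : Int) : Decidable (Spec_solution land out) := by
  unfold Spec_solution; infer_instance

-- ===== CLAIM (what is proved, stated in full; the proofs are below) =====
def Claim_equal_solution : Prop := ∀ (land : List (List Int)), Dom_solution land →
  Pre_solution land → Spec_solution land (solution land)

-- ===== LEMMAS AND PROOFS =====

-- ---------- shared grid lemmas (A side primitives) ----------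

theorem pvGet_eq (g : List (List Int)) {i j : Int} (hi : 0 ≤ i) (hj : 0 ≤ j) :
    pvGet g i j = (g[i.toNat]?).bind (fun row => row[j.toNat]?) := by
  unfold pvGet
  rw [PySem.List.pyGet?_of_nonneg g hi]
  cases g[i.toNat]? with
  | none => rfl
  | some row => simp [PySem.List.pyGet?_of_nonneg row hj]

theorem toNat_inj_of_nonneg {i x : Int} (hi : 0 ≤ i) (hx : 0 ≤ x) (h : i.toNat = x.toNat) :
    i = x := by omega

theorem pvGet_pvSet0_ne (g : List (List Int)) {i j x y : Int}
    (hi : 0 ≤ i) (hj : 0 ≤ j) (hx : 0 ≤ x) (hy : 0 ≤ y) (hne : (i, j) ≠ (x, y)) :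
    pvGet (pvSet0 g i j) x y = pvGet g x y := by
  rw [pvGet_eq _ hx hy, pvGet_eq _ hx hy]
  unfold pvSet0
  by_cases hr : i.toNat = x.toNat
  · have hix : i = x := toNat_inj_of_nonneg hi hx hr
    subst hix
    have hjy : j ≠ y := by intro h; exact hne (by rw [h])
    have hjy' : j.toNat ≠ y.toNat := fun h => hjy (toNat_inj_of_nonneg hj hy h)
    rw [List.getElem?_set]
    by_cases hlen : i.toNat < g.length
    · simp only [if_pos hlen]
      have : g.getD i.toNat [] = g[i.toNat]'hlen := by
        rw [List.getD_eq_getElem?_getD, List.getElem?_eq_getElem hlen]; rfl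
      rw [this]
      rw [List.getElem?_eq_getElem hlen]
      simp [List.getElem?_set_ne hjy']
    · simp only [if_neg hlen]
      rw [List.getElem?_eq_none (by omega)]
      rfl
  · rw [List.getElem?_set_ne hr]

theorem pvGet_pvSet0_self (g : List (List Int)) {i j : Int} {v : Int}
    (hi : 0 ≤ i) (hj : 0 ≤ j) (h : pvGet g i j = some v) :
    pvGet (pvSet0 g i j) i j = some 0 := by
  rw [pvGet_eq _ hi hj] at h ⊢
  unfold pvSet0
  cases hrow : g[i.toNat]? with
  | none => rw [hrow] at h; simp at h
  | some row =>
    rw [hrow] at h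
    simp only [Option.bind_some] at h
    have hlen : i.toNat < g.length := by
      by_contra hc
      rw [List.getElem?_eq_none (by omega)] at hrow; simp at hrow
    have hjlen : j.toNat < row.length := by
      by_contra hc
      rw [List.getElem?_eq_none (by omega)] at h; simp at h
    have hgd : g.getD i.toNat [] = row := by
      rw [List.getD_eq_getElem?_getD, hrow]; rfl
    rw [hgd, List.getElem?_set_self (by simpa using hlen)]
    simp [List.getElem?_set_self (by simpa using hjlen)]

theorem countP_set_zero (row : List Int) (t : Nat) (h : row[t]? = some 1) :
    ((row.set t 0).countP (fun v => v == 1)) + 1 = row.countP (fun v => v == 1) := by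
  induction row generalizing t with
  | nil => simp at h
  | cons a rest ih =>
    cases t with
    | zero =>
      simp at h
      subst h
      simp
    | succ t' =>
      simp at h
      have := ih t' h
      simp only [List.set_cons_succ, List.countP_cons]
      omega

theorem pvOnes_set (g : List (List Int)) (k : Nat) (r : List Int) (hk : k < g.length) :
    pvOnes (g.set k r) + (g[k]'hk).countP (fun v => v == 1)
      = pvOnes g + r.countP (fun v => v == 1) := by
  induction g generalizing k with
  | nil => simp at hk
  | cons row rest ih =>
    cases k with
    | zero => simp [pvOnes]; omega
    | succ k' =>
      have := ih k' (by simpa using hk)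
      simp [pvOnes] at this ⊢
      omega

theorem pvOnes_set0 (g : List (List Int)) {i j : Int}
    (hi : 0 ≤ i) (hj : 0 ≤ j) (h : pvGet g i j = some 1) :
    pvOnes (pvSet0 g i j) + 1 = pvOnes g := by
  rw [pvGet_eq _ hi hj] at h
  cases hrow : g[i.toNat]? with
  | none => rw [hrow] at h; simp at h
  | some row =>
    rw [hrow] at h
    simp only [Option.bind_some] at h
    have hlen : i.toNat < g.length := by
      by_contra hc
      rw [List.getElem?_eq_none (by omega)] at hrow; simp at hrow
    have hgd : g.getD i.toNat [] = row := by
      rw [List.getD_eq_getElem?_getD, hrow]; rfl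
    have hrowk : g[i.toNat]'hlen = row := by
      have := List.getElem?_eq_getElem hlen
      rw [this] at hrow; exact Option.some.inj hrow
    unfold pvSet0
    rw [hgd]
    have := pvOnes_set g i.toNat (row.set j.toNat 0) hlen
    rw [hrowk] at this
    have hc := countP_set_zero row j.toNat h
    omega

theorem getD_set_ne (l : List Int) {k t : Nat} (h : k ≠ t) (a : Int) (d : Int) :
    (l.set k a).getD t d = l.getD t d := by
  rw [List.getD_eq_getElem?_getD, List.getD_eq_getElem?_getD, List.getElem?_set_ne h]

-- ---------- hot cells, neighbour lists, zeroing ----------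

def pvHot (n m : Int) (g : List (List Int)) (p : Int × Int) : Bool :=
  decide (0 ≤ p.1 ∧ p.1 < n ∧ 0 ≤ p.2 ∧ p.2 < m ∧ pvGet g p.1 p.2 = some 1)

def pvAdj (c : Int × Int) : List (Int × Int) :=
  [(c.1, c.2 + 1), (c.1 + 1, c.2), (c.1, c.2 - 1), (c.1 - 1, c.2)]

def pvHotL (n m : Int) (g : List (List Int)) (c : Int × Int) : List (Int × Int) :=
  (pvAdj c).filter (pvHot n m g)

def pvZero (g : List (List Int)) (L : List (Int × Int)) : List (List Int) :=
  L.foldl (fun g p => pvSet0 g p.1 p.2) g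

def pvBody (n m : Int) (st : List (List Int) × List (Int × Int)) (p : Int × Int) :
    List (List Int) × List (Int × Int) :=
  if 0 ≤ p.1 ∧ p.1 < n ∧ 0 ≤ p.2 ∧ p.2 < m ∧ pvGet st.1 p.1 p.2 = some 1 then
    (pvSet0 st.1 p.1 p.2, st.2 ++ [p])
  else st

theorem pvHot_ok {n m : Int} {g : List (List Int)} {p : Int × Int} (h : pvHot n m g p = true) :
    0 ≤ p.1 ∧ p.1 < n ∧ 0 ≤ p.2 ∧ p.2 < m ∧ pvGet g p.1 p.2 = some 1 :=
  of_decide_eq_true h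

theorem pvHot_set0 (n m : Int) (g : List (List Int)) {c x : Int × Int}
    (h1 : 0 ≤ c.1) (h2 : 0 ≤ c.2) (hne : c ≠ x) :
    pvHot n m (pvSet0 g c.1 c.2) x = pvHot n m g x := by
  unfold pvHot
  by_cases hx : 0 ≤ x.1 ∧ x.1 < n ∧ 0 ≤ x.2 ∧ x.2 < m
  · rw [pvGet_pvSet0_ne g h1 h2 hx.1 hx.2.2.1 (by
      intro hc; apply hne; exact Prod.ext_iff.mpr ⟨congrArg Prod.fst hc, congrArg Prod.snd hc⟩)]
  · apply decide_eq_decide.mpr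
    constructor <;> intro h <;> exact absurd ⟨h.1, h.2.1, h.2.2.1, h.2.2.2.1⟩ hx

theorem pvZero_cons (g : List (List Int)) (c : Int × Int) (L : List (Int × Int)) :
    pvZero g (c :: L) = pvZero (pvSet0 g c.1 c.2) L := rfl

theorem pvAdj_pairwise (c : Int × Int) : (pvAdj c).Pairwise (· ≠ ·) := by
  simp [pvAdj, List.pairwise_cons, Prod.ext_iff]
  refine ⟨?_, ?_⟩ <;> intro a b h h2 <;> omega

theorem pvAdj_nodup (c : Int × Int) : (pvAdj c).Nodup := pvAdj_pairwise c

theorem foldBody_char (n m : Int) :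
    ∀ (cs : List (Int × Int)) (g : List (List Int)) (q : List (Int × Int)),
      cs.Pairwise (· ≠ ·) →
      cs.foldl (pvBody n m) (g, q)
        = (pvZero g (cs.filter (pvHot n m g)), q ++ cs.filter (pvHot n m g)) := by
  intro cs
  induction cs with
  | nil => intro g q _; simp [pvZero]
  | cons c rest ih =>
    intro g q hp
    rw [List.pairwise_cons] at hp
    rw [List.foldl_cons]
    by_cases h : 0 ≤ c.1 ∧ c.1 < n ∧ 0 ≤ c.2 ∧ c.2 < m ∧ pvGet g c.1 c.2 = some 1
    · have hhot : pvHot n m g c = true := decide_eq_true h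
      have hbody : pvBody n m (g, q) c = (pvSet0 g c.1 c.2, q ++ [c]) := by
        unfold pvBody; rw [if_pos h]
      rw [hbody, ih _ _ hp.2]
      have hfilter : rest.filter (pvHot n m (pvSet0 g c.1 c.2)) = rest.filter (pvHot n m g) := by
        apply List.filter_congr
        intro x hx
        exact pvHot_set0 n m g h.1 h.2.2.1 (hp.1 x hx)
      rw [hfilter]
      rw [List.filter_cons_of_pos hhot, pvZero_cons]
      simp
    · have hhot : pvHot n m g c = false := decide_eq_false h
      have hbody : pvBody n m (g, q) c = (g, q) := by
        unfold pvBody; rw [if_neg h]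
      rw [hbody, ih _ _ hp.2, List.filter_cons_of_neg (by simp [hhot])]

theorem pvAdj_eq_map (ci cj : Int) : pvAdj (ci, cj) = pvDij.map (fun d => (ci + d.1, cj + d.2)) := by
  simp [pvAdj, pvDij]
  norm_num [Int.sub_eq_add_neg]

theorem pvStepA_eq_foldBody (n m ci cj : Int) (st : List (List Int) × List (Int × Int)) :
    pvStepA n m ci cj st = (pvAdj (ci, cj)).foldl (pvBody n m) st := by
  rw [pvAdj_eq_map, List.foldl_map]
  rfl

theorem pvStepA_char (n m : Int) (g : List (List Int)) (q : List (Int × Int)) (c : Int × Int) :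
    pvStepA n m c.1 c.2 (g, q)
      = (pvZero g (pvHotL n m g c), q ++ pvHotL n m g c) := by
  rw [pvStepA_eq_foldBody]
  unfold pvHotL
  have := foldBody_char n m (pvAdj (c.1, c.2)) g q (pvAdj_pairwise _)
  simpa using this

theorem pvHotL_nodup (n m : Int) (g : List (List Int)) (c : Int × Int) :
    (pvHotL n m g c).Nodup := (pvAdj_nodup c).filter _

theorem pvHotL_hot (n m : Int) (g : List (List Int)) (c : Int × Int) :
    ∀ p ∈ pvHotL n m g c, pvHot n m g p = true := by
  intro p hp
  exact (List.mem_filter.mp hp).2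

theorem pvOnes_zero_hot (n m : Int) :
    ∀ (L : List (Int × Int)) (g : List (List Int)), L.Nodup →
      (∀ p ∈ L, pvHot n m g p = true) →
      pvOnes (pvZero g L) + L.length = pvOnes g := by
  intro L
  induction L with
  | nil => intro g _ _; simp [pvZero]
  | cons c rest ih =>
    intro g hnd hhot
    have hc := pvHot_ok (hhot c List.mem_cons_self)
    have h1 : pvOnes (pvSet0 g c.1 c.2) + 1 = pvOnes g :=
      pvOnes_set0 g hc.1 hc.2.2.1 hc.2.2.2.2
    rw [List.nodup_cons] at hnd
    have hresthot : ∀ p ∈ rest, pvHot n m (pvSet0 g c.1 c.2) p = true := by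
      intro p hp
      rw [pvHot_set0 n m g hc.1 hc.2.2.1 (fun he => hnd.1 (he ▸ hp))]
      exact hhot p (List.mem_cons_of_mem _ hp)
    have := ih (pvSet0 g c.1 c.2) hnd.2 hresthot
    rw [pvZero_cons]
    simp only [List.length_cons]
    omega

theorem pvHot_pvZero (n m : Int) :
    ∀ (L : List (Int × Int)) (g : List (List Int)) (x : Int × Int), L.Nodup →
      (∀ p ∈ L, pvHot n m g p = true) →
      pvHot n m (pvZero g L) x = (pvHot n m g x && !(decide (x ∈ L))) := by
  intro L
  induction L with
  | nil => intro g x _ _; simp [pvZero]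
  | cons c rest ih =>
    intro g x hnd hhot
    have hc := pvHot_ok (hhot c List.mem_cons_self)
    rw [List.nodup_cons] at hnd
    have hresthot : ∀ p ∈ rest, pvHot n m (pvSet0 g c.1 c.2) p = true := by
      intro p hp
      rw [pvHot_set0 n m g hc.1 hc.2.2.1 (fun he => hnd.1 (he ▸ hp))]
      exact hhot p (List.mem_cons_of_mem _ hp)
    rw [pvZero_cons, ih (pvSet0 g c.1 c.2) x hnd.2 hresthot]
    by_cases hxc : x = c
    · subst hxc
      have hget : pvGet (pvSet0 g x.1 x.2) x.1 x.2 = some 0 :=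
        pvGet_pvSet0_self g hc.1 hc.2.2.1 hc.2.2.2.2
      have : pvHot n m (pvSet0 g x.1 x.2) x = false := by
        unfold pvHot
        simp [hget]
      simp [this]
    · rw [pvHot_set0 n m g hc.1 hc.2.2.1 (fun he => hxc he.symm)]
      simp [List.mem_cons, hxc]

theorem pvGet_pvZero (n m : Int) :
    ∀ (L : List (Int × Int)) (g : List (List Int)) (i j : Int), 0 ≤ i → 0 ≤ j → L.Nodup →
      (∀ p ∈ L, pvHot n m g p = true) →
      pvGet (pvZero g L) i j = if (i, j) ∈ L then some 0 else pvGet g i j := by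
  intro L
  induction L with
  | nil => intro g i j _ _ _ _; simp [pvZero]
  | cons c rest ih =>
    intro g i j hi hj hnd hhot
    have hc := pvHot_ok (hhot c List.mem_cons_self)
    rw [List.nodup_cons] at hnd
    have hresthot : ∀ p ∈ rest, pvHot n m (pvSet0 g c.1 c.2) p = true := by
      intro p hp
      rw [pvHot_set0 n m g hc.1 hc.2.2.1 (fun he => hnd.1 (he ▸ hp))]
      exact hhot p (List.mem_cons_of_mem _ hp)
    rw [pvZero_cons, ih (pvSet0 g c.1 c.2) i j hi hj hnd.2 hresthot]
    by_cases hmem : (i, j) ∈ rest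
    · simp [hmem, List.mem_cons]
    · by_cases hxc : (i, j) = c
      · subst hxc
        simp only [hmem, List.mem_cons, true_or, if_true]
        exact pvGet_pvSet0_self g hc.1 hc.2.2.1 hc.2.2.2.2
      · have hne : c ≠ (i, j) := fun h => hxc h.symm
        rw [pvGet_pvSet0_ne g hc.1 hc.2.2.1 hi hj hne]
        simp [hmem, List.mem_cons, hxc]

theorem pvFindLoop_nil (n m : Int) (f : Nat) (g : List (List Int)) :
    pvFindLoop n m f g [] = ([], g) := by cases f <;> rfl

theorem pvFindLoop_cons (n m : Int) (f : Nat) (g : List (List Int)) (c : Int × Int)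
    (q : List (Int × Int)) :
    pvFindLoop n m (f + 1) g (c :: q)
      = (c :: (pvFindLoop n m f (pvZero g (pvHotL n m g c)) (q ++ pvHotL n m g c)).1,
         (pvFindLoop n m f (pvZero g (pvHotL n m g c)) (q ++ pvHotL n m g c)).2) := by
  show (let s := pvStepA n m c.1 c.2 (g, q)
        let r := pvFindLoop n m f s.1 s.2
        ((c :: r.1, r.2) : List (Int × Int) × List (List Int)))
      = _
  rw [pvStepA_char n m g q c]

theorem pop_measure (n m : Int) (g : List (List Int)) (c : Int × Int) (q : List (Int × Int)) :
    pvOnes (pvZero g (pvHotL n m g c)) + (q ++ pvHotL n m g c).length + 1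
      = pvOnes g + (c :: q).length := by
  have := pvOnes_zero_hot n m (pvHotL n m g c) g (pvHotL_nodup n m g c) (pvHotL_hot n m g c)
  simp only [List.length_append, List.length_cons]
  omega

-- ---------- connectivity on hot cells ----------

theorem pvAdj_symm {p q : Int × Int} : q ∈ pvAdj p ↔ p ∈ pvAdj q := by
  simp [pvAdj, Prod.ext_iff]
  constructor <;> (rintro (⟨h1, h2⟩ | ⟨h1, h2⟩ | ⟨h1, h2⟩ | ⟨h1, h2⟩) <;> omega)

def pvStepR (n m : Int) (g : List (List Int)) (p q : Int × Int) : Prop :=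
  q ∈ pvAdj p ∧ pvHot n m g q = true

def pvReach (n m : Int) (g : List (List Int)) (s x : Int × Int) : Prop :=
  Relation.ReflTransGen (pvStepR n m g) s x

def pvReachL (n m : Int) (g : List (List Int)) (qs : List (Int × Int)) (x : Int × Int) : Prop :=
  ∃ s ∈ qs, pvReach n m g s x

noncomputable def pvInd (P : Prop) : Int := @ite _ P (Classical.propDecidable P) 1 0

theorem pvInd_pos {P : Prop} (h : P) : pvInd P = 1 := by
  unfold pvInd; exact @if_pos P (Classical.propDecidable P) h _ _ _

theorem pvInd_neg {P : Prop} (h : ¬ P) : pvInd P = 0 := by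
  unfold pvInd; exact @if_neg P (Classical.propDecidable P) h _ _ _

theorem pvInd_congr {P Q : Prop} (h : P ↔ Q) : pvInd P = pvInd Q := by
  by_cases hp : P
  · rw [pvInd_pos hp, pvInd_pos (h.mp hp)]
  · rw [pvInd_neg hp, pvInd_neg (fun hq => hp (h.mpr hq))]

noncomputable def pvIf {α : Type} (P : Prop) (a b : α) : α :=
  @ite _ P (Classical.propDecidable P) a b

theorem pvIf_pos {α : Type} {P : Prop} (h : P) (a b : α) : pvIf P a b = a := by
  unfold pvIf; exact @if_pos P (Classical.propDecidable P) h _ _ _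

theorem pvIf_neg {α : Type} {P : Prop} (h : ¬ P) (a b : α) : pvIf P a b = b := by
  unfold pvIf; exact @if_neg P (Classical.propDecidable P) h _ _ _

def pvTouch (n m : Int) (g : List (List Int)) (p : Int × Int) (c : Int) : Prop :=
  ∃ x, pvReach n m g p x ∧ x.2 = c

noncomputable def pvNT (n m : Int) (g : List (List Int)) (D : List (Int × Int)) (c : Int) : Int :=
  (D.map (fun p => pvInd (pvTouch n m g p c))).sum

def pvCells (n m : Int) : List (Int × Int) :=
  (PySem.List.pyRange 0 n 1).flatMap (fun i => (PySem.List.pyRange 0 m 1).map (fun j => (i, j)))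

theorem mem_pvCells {n m : Int} {p : Int × Int} :
    p ∈ pvCells n m ↔ 0 ≤ p.1 ∧ p.1 < n ∧ 0 ≤ p.2 ∧ p.2 < m := by
  unfold pvCells
  constructor
  · intro h
    obtain ⟨i, hi, h2⟩ := List.mem_flatMap.mp h
    obtain ⟨j, hj, he⟩ := List.mem_map.mp h2
    rw [PySem.List.mem_pyRange_one] at hi hj
    subst he
    exact ⟨hi.1, hi.2, hj.1, hj.2⟩
  · intro ⟨h1, h2, h3, h4⟩
    exact List.mem_flatMap.mpr ⟨p.1, PySem.List.mem_pyRange_one.mpr ⟨h1, h2⟩,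
      List.mem_map.mpr ⟨p.2, PySem.List.mem_pyRange_one.mpr ⟨h3, h4⟩, by simp⟩⟩

theorem nodup_flatMap_pairs (l1 l2 : List Int) (h1 : l1.Nodup) (h2 : l2.Nodup) :
    (l1.flatMap (fun a => l2.map (fun b => (a, b)))).Nodup := by
  induction l1 with
  | nil => simp
  | cons a rest ih =>
    rw [List.nodup_cons] at h1
    rw [List.flatMap_cons]
    apply List.Nodup.append
    · exact h2.map (fun x y h => by simpa using congrArg Prod.snd h)
    · exact ih h1.2
    · intro x hx hx2
      obtain ⟨b, _, rfl⟩ := List.mem_map.mp hx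
      obtain ⟨a', ha', hx2'⟩ := List.mem_flatMap.mp hx2
      obtain ⟨b', _, he⟩ := List.mem_map.mp hx2'
      have : a' = a := congrArg Prod.fst he
      exact h1.1 (this ▸ ha')

theorem nodup_pvCells (n m : Int) : (pvCells n m).Nodup :=
  nodup_flatMap_pairs _ _ (PySem.List.nodup_pyRange_one 0 n) (PySem.List.nodup_pyRange_one 0 m)

def pvO (n m : Int) (g : List (List Int)) : List (Int × Int) :=
  (pvCells n m).filter (fun p => pvHot n m g p)

theorem mem_pvO {n m : Int} {g : List (List Int)} {p : Int × Int} :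
    p ∈ pvO n m g ↔ pvHot n m g p = true := by
  unfold pvO
  rw [List.mem_filter]
  constructor
  · exact fun h => h.2
  · intro h
    have hb := pvHot_ok h
    exact ⟨mem_pvCells.mpr ⟨hb.1, hb.2.1, hb.2.2.1, hb.2.2.2.1⟩, h⟩

theorem nodup_pvO (n m : Int) (g : List (List Int)) : (pvO n m g).Nodup :=
  (nodup_pvCells n m).filter _

theorem reach_target {n m : Int} {g : List (List Int)} {s x : Int × Int}
    (h : pvReach n m g s x) : x = s ∨ pvHot n m g x = true := by
  induction h with
  | refl => exact Or.inl rfl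
  | tail _ hstep _ => exact Or.inr hstep.2

theorem reach_mono {n m : Int} {g1 g : List (List Int)}
    (hsub : ∀ y, pvHot n m g1 y = true → pvHot n m g y = true) {s x : Int × Int}
    (h : pvReach n m g1 s x) : pvReach n m g s x := by
  induction h with
  | refl => exact Relation.ReflTransGen.refl
  | tail _ hstep ih => exact Relation.ReflTransGen.tail ih ⟨hstep.1, hsub _ hstep.2⟩

theorem reach_symm {n m : Int} {g : List (List Int)} {s x : Int × Int}
    (hs : pvHot n m g s = true) (h : pvReach n m g s x) : pvReach n m g x s := by
  induction h with
  | refl => exact Relation.ReflTransGen.refl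
  | @tail y x _ hstep ih =>
    have hyhot : pvHot n m g y = true := by
      rcases reach_target (by assumption : pvReach n m g s y) with h1 | h1
      · rw [h1]; exact hs
      · exact h1
    exact Relation.ReflTransGen.head ⟨pvAdj_symm.mp hstep.1, hyhot⟩ ih

-- ---------- the per-component column-credit fold of A, pointwise ----------

def pvAddAt (L : Int) (ls : List Int) (c : Int) : List Int :=
  PySem.List.pySetD ls c (PySem.List.pyGetD ls c 0 + L)

theorem markF_fold (L : Int) :
    ∀ (ans : List (Int × Int)) (v : List Bool) (ls : List Int),
      (∀ p ∈ ans, 0 ≤ p.2 ∧ p.2.toNat < v.length) →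
      (ans.foldl (fun (s : List Bool × List Int) a =>
          if PySem.List.pyGet? s.1 a.2 = some false then
            (PySem.List.pySetD s.1 a.2 true,
             PySem.List.pySetD s.2 a.2 (PySem.List.pyGetD s.2 a.2 0 + L))
          else s) (v, ls)).2
        = ((PySem.List.dedup (ans.map (fun p => p.2))).filter
            (fun c => PySem.List.pyGet? v c = some false)).foldl (pvAddAt L) ls := by
  intro ans
  induction ans with
  | nil => intro v ls _; simp [PySem.List.dedup]
  | cons a rest ih =>
    intro v ls hb
    have ha := hb a List.mem_cons_self
    have hrest : ∀ p ∈ rest, 0 ≤ p.2 ∧ p.2.toNat < v.length :=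
      fun p hp => hb p (List.mem_cons_of_mem _ hp)
    have hget : PySem.List.pyGet? v a.2 = v[a.2.toNat]? :=
      PySem.List.pyGet?_of_nonneg v ha.1
    have hgetsome : v[a.2.toNat]? = some (v[a.2.toNat]'ha.2) := List.getElem?_eq_getElem ha.2
    have hdedup : PySem.List.dedup ((a :: rest).map (fun p => p.2))
        = a.2 :: (PySem.List.dedup (rest.map (fun p => p.2))).filter (fun y => !(y == a.2)) := by
      simp only [List.map_cons, PySem.List.dedup_eq_ofList, PySem.Set.ofList_cons]
      rw [show ∀ s : PySem.Set Int, PySem.Set.discard s a.2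
            = s.filter (fun y => !(y == a.2)) from fun s => by simp [PySem.Set.discard]]
    rw [List.foldl_cons, hdedup]
    by_cases hfalse : v[a.2.toNat]'ha.2 = false
    · rw [if_pos (by rw [hget, hgetsome, hfalse])]
      have hv' : PySem.List.pySetD v a.2 true = v.set a.2.toNat true :=
        PySem.List.pySetD_of_nonneg v true ha.1
      rw [hv']
      rw [ih (v.set a.2.toNat true) _ (by simpa using hrest)]
      rw [List.filter_cons_of_pos (by rw [hget, hgetsome, hfalse]; simp)]
      rw [List.filter_filter]
      have : (PySem.List.dedup (rest.map (fun p => p.2))).filter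
            (fun c => PySem.List.pyGet? (v.set a.2.toNat true) c = some false)
          = (PySem.List.dedup (rest.map (fun p => p.2))).filter
            (fun c => decide (PySem.List.pyGet? v c = some false) && !(c == a.2)) := by
        apply List.filter_congr
        intro c hc
        have hcmem : c ∈ rest.map (fun p => p.2) := by
          have := (PySem.List.mem_dedup (rest.map (fun p => p.2)) c).mp hc
          exact this
        obtain ⟨p, hp, hpc⟩ := List.mem_map.mp hcmem
        have hcb := hrest p hp
        rw [hpc] at hcb
        by_cases hca : c = a.2
        · subst hca
          rw [PySem.List.pyGet?_of_nonneg _ hcb.1,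
              List.getElem?_set_self (by simpa using ha.2)]
          simp
        · have : c.toNat ≠ a.2.toNat := fun h => hca (toNat_inj_of_nonneg hcb.1 ha.1 h)
          rw [PySem.List.pyGet?_of_nonneg _ hcb.1, List.getElem?_set_ne (Ne.symm this),
              ← PySem.List.pyGet?_of_nonneg v hcb.1]
          simp [hca]
      rw [this]
      have : (PySem.List.dedup (rest.map (fun p => p.2))).filter
            (fun c => decide (PySem.List.pyGet? v c = some false) && !(c == a.2))
          = ((PySem.List.dedup (rest.map (fun p => p.2))).filter (fun y => !(y == a.2))).filter
            (fun c => PySem.List.pyGet? v c = some false) := by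
        rw [List.filter_filter]
      rw [this]
      rfl
    · have htrue : v[a.2.toNat]'ha.2 = true := by
        cases h : v[a.2.toNat]'ha.2
        · exact absurd h hfalse
        · rfl
      rw [if_neg (by rw [hget, hgetsome, htrue]; simp)]
      rw [ih v ls hrest]
      rw [List.filter_cons_of_neg (by rw [hget, hgetsome, htrue]; simp)]
      congr 1
      rw [List.filter_filter]
      apply List.filter_congr
      intro c hc
      by_cases hca : c = a.2
      · subst hca
        rw [hget, hgetsome, htrue]
        simp
      · simp [hca]

theorem pvMarkA_eq (m L : Int) (ans : List (Int × Int)) (ls : List Int)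
    (hm : 0 ≤ m) (hb : ∀ p ∈ ans, 0 ≤ p.2 ∧ p.2 < m) :
    pvMarkA m L ans ls
      = (PySem.List.dedup (ans.map (fun p => p.2))).foldl (pvAddAt L) ls := by
  unfold pvMarkA
  rw [markF_fold L ans (List.replicate m.toNat false) ls
    (by intro p hp; have := hb p hp; simp; omega)]
  congr 1
  apply List.filter_eq_self.mpr
  intro c hc
  have hcmem : c ∈ ans.map (fun p => p.2) :=
    (PySem.List.mem_dedup (ans.map (fun p => p.2)) c).mp hc
  obtain ⟨p, hp, hpc⟩ := List.mem_map.mp hcmem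
  have hcb := hb p hp
  rw [hpc] at hcb
  rw [PySem.List.pyGet?_of_nonneg _ hcb.1]
  rw [List.getElem?_replicate]
  simp only [if_pos (show c.toNat < m.toNat by omega)]
  simp

theorem foldAddAt_length (L : Int) :
    ∀ (C : List Int) (ls : List Int), (∀ c ∈ C, 0 ≤ c) →
      (C.foldl (pvAddAt L) ls).length = ls.length := by
  intro C
  induction C with
  | nil => intro ls _; rfl
  | cons c rest ih =>
    intro ls hb
    rw [List.foldl_cons]
    rw [ih _ (fun c hc => hb c (List.mem_cons_of_mem _ hc))]
    unfold pvAddAt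
    rw [PySem.List.pySetD_of_nonneg _ _ (hb c List.mem_cons_self)]
    exact List.length_set ..

theorem foldAddAt_getD (L : Int) :
    ∀ (C : List Int) (ls : List Int), C.Nodup → (∀ c ∈ C, 0 ≤ c) →
      ∀ (t : Nat), t < ls.length →
      (C.foldl (pvAddAt L) ls).getD t 0
        = ls.getD t 0 + (if ((t : Int)) ∈ C then L else 0) := by
  intro C
  induction C with
  | nil => intro ls _ _ t _; simp
  | cons c rest ih =>
    intro ls hnd hb t ht
    rw [List.nodup_cons] at hnd
    rw [List.foldl_cons]
    have hc0 : 0 ≤ c := hb c List.mem_cons_self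
    have hset : pvAddAt L ls c = ls.set c.toNat (ls.getD c.toNat 0 + L) := by
      unfold pvAddAt
      rw [PySem.List.pySetD_of_nonneg _ _ hc0, PySem.List.pyGetD_of_nonneg _ _ hc0]
    have hlen : (pvAddAt L ls c).length = ls.length := by
      rw [hset]; exact List.length_set ..
    rw [ih _ hnd.2 (fun c hc => hb c (List.mem_cons_of_mem _ hc)) t (by omega)]
    by_cases hct : (t : Int) = c
    · have htc : t = c.toNat := by omega
      have hrest : ((t : Int)) ∉ rest := fun h => hnd.1 (hct ▸ h)
      rw [hset, ← htc]
      rw [if_neg hrest, if_pos (by simp [hct])]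
      rw [List.getD_eq_getElem?_getD, List.getElem?_set_self (by omega)]
      rw [htc]
      simp
    · have : c.toNat ≠ t := by omega
      rw [hset, getD_set_ne _ this]
      by_cases hmem : ((t : Int)) ∈ rest
      · rw [if_pos hmem, if_pos (List.mem_cons_of_mem _ hmem)]
      · rw [if_neg hmem, if_neg (by simp [hct, hmem])]


-- ---------- BFS (find) computes exactly the reachable cells ----------

theorem reachL_target {n m : Int} {g : List (List Int)} {qs : List (Int × Int)} {x : Int × Int}
    (h : pvReachL n m g qs x) : x ∈ qs ∨ pvHot n m g x = true := by
  obtain ⟨s, hs, r⟩ := h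
  rcases reach_target r with h1 | h1
  · exact Or.inl (h1 ▸ hs)
  · exact Or.inr h1

theorem reachL_pop (n m : Int) (g : List (List Int)) (c : Int × Int) (qt : List (Int × Int))
    (_hc : pvHot n m g c = false) (x : Int × Int) :
    pvReachL n m g (c :: qt) x ↔
      x = c ∨ pvReachL n m (pvZero g (pvHotL n m g c)) (qt ++ pvHotL n m g c) x := by
  have hLnd := pvHotL_nodup n m g c
  have hLhot := pvHotL_hot n m g c
  have hhot1 : ∀ y, pvHot n m (pvZero g (pvHotL n m g c)) y
      = (pvHot n m g y && !(decide (y ∈ pvHotL n m g c))) :=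
    fun y => pvHot_pvZero n m (pvHotL n m g c) g y hLnd hLhot
  constructor
  · rintro ⟨s, hs, hreach⟩
    induction hreach with
    | refl =>
      rcases List.mem_cons.mp hs with h | h
      · exact Or.inl h
      · exact Or.inr ⟨s, List.mem_append_left _ h, Relation.ReflTransGen.refl⟩
    | @tail y x' r step ih =>
      rcases ih with h | h
      · have hxL : x' ∈ pvHotL n m g c := List.mem_filter.mpr ⟨h ▸ step.1, step.2⟩
        exact Or.inr ⟨x', List.mem_append_right _ hxL, Relation.ReflTransGen.refl⟩
      · by_cases hxL : x' ∈ pvHotL n m g c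
        · exact Or.inr ⟨x', List.mem_append_right _ hxL, Relation.ReflTransGen.refl⟩
        · obtain ⟨s', hs', r'⟩ := h
          refine Or.inr ⟨s', hs', Relation.ReflTransGen.tail r' ⟨step.1, ?_⟩⟩
          rw [hhot1]
          simp [step.2, hxL]
  · rintro (h | ⟨s, hs, r⟩)
    · exact ⟨c, List.mem_cons_self, h ▸ Relation.ReflTransGen.refl⟩
    · have rg : pvReach n m g s x := by
        refine reach_mono (fun y hy => ?_) r
        rw [hhot1] at hy
        exact (Bool.and_eq_true_iff.mp hy).1
      rcases List.mem_append.mp hs with h1 | h1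
      · exact ⟨s, List.mem_cons_of_mem _ h1, rg⟩
      · refine ⟨c, List.mem_cons_self, Relation.ReflTransGen.head ?_ rg⟩
        exact ⟨(List.mem_filter.mp h1).1, (List.mem_filter.mp h1).2⟩

theorem pvFindLoop_char (n m : Int) :
    ∀ (f : Nat) (g : List (List Int)) (q : List (Int × Int)),
      q.Nodup → (∀ p ∈ q, pvHot n m g p = false) → pvOnes g + q.length ≤ f →
      (∀ x, x ∈ (pvFindLoop n m f g q).1 ↔ pvReachL n m g q x) ∧
      (pvFindLoop n m f g q).1.Nodup ∧
      (∀ i j, 0 ≤ i → 0 ≤ j →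
        pvGet (pvFindLoop n m f g q).2 i j
          = pvIf (pvHot n m g (i, j) = true ∧ pvReachL n m g q (i, j)) (some 0)
              (pvGet g i j)) := by
  intro f
  induction f with
  | zero =>
    intro g q hnd hnh hf
    have hq : q = [] := by
      cases q with
      | nil => rfl
      | cons a t => simp at hf
    subst hq
    rw [pvFindLoop_nil]
    refine ⟨by simp [pvReachL], by simp, ?_⟩
    intro i j _ _
    rw [pvIf_neg (by rintro ⟨_, _, h, _⟩; simp at h)]
  | succ f ih =>
    intro g q hnd hnh hf
    cases q with
    | nil =>
      rw [pvFindLoop_nil]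
      refine ⟨by simp [pvReachL], by simp, ?_⟩
      intro i j _ _
      rw [pvIf_neg (by rintro ⟨_, _, h, _⟩; simp at h)]
    | cons c qt =>
      have hc : pvHot n m g c = false := hnh c List.mem_cons_self
      have hLnd := pvHotL_nodup n m g c
      have hLhot := pvHotL_hot n m g c
      have hhot1 : ∀ y, pvHot n m (pvZero g (pvHotL n m g c)) y
          = (pvHot n m g y && !(decide (y ∈ pvHotL n m g c))) :=
        fun y => pvHot_pvZero n m (pvHotL n m g c) g y hLnd hLhot
      rw [List.nodup_cons] at hnd
      have hbnd : (qt ++ pvHotL n m g c).Nodup := by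
        refine List.Nodup.append hnd.2 hLnd ?_
        intro x hx hxL
        have := hnh x (List.mem_cons_of_mem _ hx)
        rw [hLhot x hxL] at this
        simp at this
      have hbnh : ∀ p ∈ qt ++ pvHotL n m g c,
          pvHot n m (pvZero g (pvHotL n m g c)) p = false := by
        intro p hp
        rw [hhot1]
        rcases List.mem_append.mp hp with h1 | h1
        · rw [hnh p (List.mem_cons_of_mem _ h1)]; rfl
        · simp [h1]
      have hmeas := pop_measure n m g c qt
      have hf' : pvOnes (pvZero g (pvHotL n m g c)) + (qt ++ pvHotL n m g c).length ≤ f := by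
        simp only [List.length_append, List.length_cons] at hmeas hf ⊢
        omega
      obtain ⟨ihm, ihnd, ihg⟩ := ih (pvZero g (pvHotL n m g c)) (qt ++ pvHotL n m g c) hbnd hbnh hf'
      rw [pvFindLoop_cons]
      refine ⟨?_, ?_, ?_⟩
      · intro x
        rw [List.mem_cons, ihm x, reachL_pop n m g c qt hc x]
      · refine List.nodup_cons.mpr ⟨?_, ihnd⟩
        intro hmem
        rcases reachL_target ((ihm c).mp hmem) with h1 | h1
        · rcases List.mem_append.mp h1 with h2 | h2
          · exact hnd.1 h2
          · rw [hLhot c h2] at hc; simp at hc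
        · rw [hhot1 c, hc] at h1; simp at h1
      · intro i j hi hj
        rw [ihg i j hi hj]
        have hget1 : pvGet (pvZero g (pvHotL n m g c)) i j
            = if (i, j) ∈ pvHotL n m g c then some 0 else pvGet g i j :=
          pvGet_pvZero n m (pvHotL n m g c) g i j hi hj hLnd hLhot
        by_cases hxL : (i, j) ∈ pvHotL n m g c
        · have hreach : pvReachL n m g (c :: qt) (i, j) :=
            ⟨c, List.mem_cons_self,
              Relation.ReflTransGen.single ⟨(List.mem_filter.mp hxL).1, hLhot _ hxL⟩⟩
          rw [pvIf_neg (by rw [hhot1]; simp [hxL]), hget1, if_pos hxL]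
          rw [pvIf_pos ⟨hLhot _ hxL, hreach⟩]
        · have hh1 : pvHot n m (pvZero g (pvHotL n m g c)) (i, j) = pvHot n m g (i, j) := by
            rw [hhot1]; simp [hxL]
          rw [hget1, if_neg hxL, hh1]
          by_cases hxc : (i, j) = c
          · rw [pvIf_neg (by rw [hxc]; intro h1; rw [hc] at h1; simp at h1),
                pvIf_neg (by rw [hxc]; intro h1; rw [hc] at h1; simp at h1)]
          · have hre : pvReachL n m g (c :: qt) (i, j)
                ↔ pvReachL n m (pvZero g (pvHotL n m g c)) (qt ++ pvHotL n m g c) (i, j) := by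
              rw [reachL_pop n m g c qt hc]
              exact ⟨fun h => h.resolve_left hxc, Or.inr⟩
            by_cases hcond : pvHot n m g (i, j) = true ∧ pvReachL n m g (c :: qt) (i, j)
            · rw [pvIf_pos ⟨hcond.1, hre.mp hcond.2⟩, pvIf_pos hcond]
            · rw [pvIf_neg (fun h => hcond ⟨h.1, hre.mpr h.2⟩), pvIf_neg hcond]

theorem pvFind_char (n m : Int) (g : List (List Int)) (s : Int × Int)
    (hs : pvHot n m g s = true) :
    (∀ x, x ∈ (pvFind g n m s.1 s.2).1 ↔ pvReach n m g s x) ∧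
    (pvFind g n m s.1 s.2).1.Nodup ∧
    (∀ i j, 0 ≤ i → 0 ≤ j →
      pvGet (pvFind g n m s.1 s.2).2 i j
        = pvIf (pvReach n m g s (i, j)) (some 0) (pvGet g i j)) := by
  have hsingle : ∀ p ∈ [s], pvHot n m g p = true := by
    intro p hp; simp at hp; rw [hp]; exact hs
  have hhot1 : ∀ y, pvHot n m (pvZero g [s]) y = (pvHot n m g y && !(decide (y ∈ [s]))) :=
    fun y => pvHot_pvZero n m [s] g y (by simp) hsingle
  have hnh : ∀ p ∈ [s], pvHot n m (pvZero g [s]) p = false := by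
    intro p hp; simp at hp; subst hp; rw [hhot1]; simp
  obtain ⟨ihm, ihnd, ihg⟩ := pvFindLoop_char n m (pvOnes (pvZero g [s]) + 1) (pvZero g [s]) [s]
    (by simp) hnh (by simp)
  have hequiv : ∀ x, pvReachL n m (pvZero g [s]) [s] x ↔ pvReach n m g s x := by
    intro x
    constructor
    · rintro ⟨s', hs', r⟩
      simp at hs'
      subst hs'
      refine reach_mono (fun y hy => ?_) r
      rw [hhot1] at hy
      exact (Bool.and_eq_true_iff.mp hy).1
    · intro r
      induction r with
      | refl => exact ⟨s, by simp, Relation.ReflTransGen.refl⟩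
      | @tail y x' r' step ih =>
        by_cases hxs : x' = s
        · exact ⟨s, by simp, hxs ▸ Relation.ReflTransGen.refl⟩
        · obtain ⟨s', hs', r1⟩ := ih
          refine ⟨s', hs', Relation.ReflTransGen.tail r1 ⟨step.1, ?_⟩⟩
          rw [hhot1]
          simp [step.2, hxs]
  have hfind : pvFind g n m s.1 s.2
      = pvFindLoop n m (pvOnes (pvZero g [s]) + 1) (pvZero g [s]) [s] := rfl
  rw [hfind]
  refine ⟨fun x => (ihm x).trans (hequiv x), ihnd, ?_⟩
  intro i j hi hj
  rw [ihg i j hi hj]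
  have hget1 : pvGet (pvZero g [s]) i j = if (i, j) ∈ [s] then some 0 else pvGet g i j :=
    pvGet_pvZero n m [s] g i j hi hj (by simp) hsingle
  by_cases hxs : (i, j) = s
  · rw [pvIf_neg (by
      intro ⟨h1, _⟩
      rw [hhot1] at h1
      simp [hxs] at h1)]
    rw [hget1, if_pos (by simp [hxs])]
    rw [pvIf_pos (hxs ▸ (Relation.ReflTransGen.refl : pvReach n m g s s))]
  · rw [hget1, if_neg (by simp [hxs])]
    by_cases hcond : pvReach n m g s (i, j)
    · have hr1 : pvReachL n m (pvZero g [s]) [s] (i, j) := (hequiv _).mpr hcond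
      have hhot : pvHot n m (pvZero g [s]) (i, j) = true := by
        rcases reachL_target hr1 with h1 | h1
        · simp at h1; exact absurd h1 hxs
        · exact h1
      rw [pvIf_pos ⟨hhot, hr1⟩, pvIf_pos hcond]
    · rw [pvIf_neg (fun h => hcond ((hequiv _).mp h.2)), pvIf_neg hcond]

theorem pvFind_all_hot (n m : Int) (g : List (List Int)) (s : Int × Int)
    (hs : pvHot n m g s = true) :
    ∀ x ∈ (pvFind g n m s.1 s.2).1, pvHot n m g x = true := by
  intro x hx
  have := ((pvFind_char n m g s hs).1 x).mp hx
  rcases reach_target this with h | h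
  · rw [h]; exact hs
  · exact h

-- ---------- the outer scan of A: column totals as per-cell component sums ----------

theorem pvHot_of_inv (n m : Int) (g0 g : List (List Int)) (D : List (Int × Int))
    (hD : ∀ p ∈ D, pvHot n m g0 p = true)
    (hg : ∀ i j, 0 ≤ i → 0 ≤ j → pvGet g i j = if (i, j) ∈ D then some 0 else pvGet g0 i j)
    (x : Int × Int) : pvHot n m g x = (pvHot n m g0 x && !(decide (x ∈ D))) := by
  by_cases hb : 0 ≤ x.1 ∧ x.1 < n ∧ 0 ≤ x.2 ∧ x.2 < m
  · have hgx := hg x.1 x.2 hb.1 hb.2.2.1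
    by_cases hmem : x ∈ D
    · rw [if_pos (by simpa using hmem)] at hgx
      have h1 : pvHot n m g x = false := by
        unfold pvHot
        simp [hgx]
      rw [h1, hD x hmem]
      simp [hmem]
    · rw [if_neg (by simpa using hmem)] at hgx
      unfold pvHot
      rw [hgx]
      simp [hmem]
  · have h1 : pvHot n m g x = false := by
      apply decide_eq_false
      rintro ⟨h1, h2, h3, h4, _⟩
      exact hb ⟨h1, h2, h3, h4⟩
    have h2 : pvHot n m g0 x = false := by
      apply decide_eq_false
      rintro ⟨h1, h2, h3, h4, _⟩
      exact hb ⟨h1, h2, h3, h4⟩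
    rw [h1, h2]
    rfl

theorem reach_eq_of_closed (n m : Int) (g0 g : List (List Int)) (D : List (Int × Int))
    (hD : ∀ p ∈ D, pvHot n m g0 p = true)
    (hcl : ∀ p ∈ D, ∀ x, pvReach n m g0 p x → x ∈ D)
    (hg : ∀ i j, 0 ≤ i → 0 ≤ j → pvGet g i j = if (i, j) ∈ D then some 0 else pvGet g0 i j)
    (t : Int × Int) (htD : t ∉ D) (htHot : pvHot n m g0 t = true) :
    ∀ x, pvReach n m g t x ↔ pvReach n m g0 t x := by
  have hhot : ∀ x, pvHot n m g x = (pvHot n m g0 x && !(decide (x ∈ D))) :=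
    pvHot_of_inv n m g0 g D hD hg
  intro x
  constructor
  · refine reach_mono (fun y hy => ?_)
    rw [hhot] at hy
    exact (Bool.and_eq_true_iff.mp hy).1
  · intro r
    induction r with
    | refl => exact Relation.ReflTransGen.refl
    | @tail y x' r' step ih =>
      have hyg0 : pvHot n m g0 y = true ∨ y = t := by
        rcases reach_target ih with h | h
        · exact Or.inr h
        · rw [hhot] at h
          exact Or.inl (Bool.and_eq_true_iff.mp h).1
      have hxD : x' ∉ D := by
        intro hxD
        have hyD : y ∈ D := by
          refine hcl x' hxD y (Relation.ReflTransGen.single ⟨pvAdj_symm.mp step.1, ?_⟩)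
          rcases hyg0 with h | h
          · exact h
          · subst h
            exact htHot
        rcases reach_target ih with h | h
        · exact htD (h ▸ hyD)
        · rw [hhot] at h
          have := (Bool.and_eq_true_iff.mp h).2
          simp [hyD] at this
      refine Relation.ReflTransGen.tail ih ⟨step.1, ?_⟩
      rw [hhot]
      simp [step.2, hxD]

def pvInvA (n m : Int) (g0 : List (List Int)) (st : List (List Int) × List Int)
    (D : List (Int × Int)) : Prop :=
  D.Nodup ∧ (∀ p ∈ D, pvHot n m g0 p = true) ∧
  (∀ p ∈ D, ∀ x, pvReach n m g0 p x → x ∈ D) ∧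
  (∀ i j, 0 ≤ i → 0 ≤ j → pvGet st.1 i j = if (i, j) ∈ D then some 0 else pvGet g0 i j) ∧
  st.2.length = m.toNat ∧
  (∀ t : Nat, t < m.toNat → st.2.getD t 0 = pvNT n m g0 D ((t : Int)))

theorem pvCellA_step (n m : Int) (g0 : List (List Int)) (st : List (List Int) × List Int)
    (D : List (Int × Int)) (t : Int × Int)
    (hb : 0 ≤ t.1 ∧ t.1 < n ∧ 0 ≤ t.2 ∧ t.2 < m) (hinv : pvInvA n m g0 st D) :
    ∃ D', pvInvA n m g0 (pvCellA n m st t.1 t.2) D' ∧ (∀ p ∈ D, p ∈ D') ∧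
      (pvHot n m g0 t = true → t ∈ D') := by
  obtain ⟨hnd, hDhot, hcl, hgrid, hlen, hls⟩ := hinv
  by_cases hcase : pvGet st.1 t.1 t.2 = some 1
  · have hgt := hgrid t.1 t.2 hb.1 hb.2.2.1
    have htD : t ∉ D := by
      intro hmem
      rw [if_pos (by simpa using hmem), hcase] at hgt
      simp at hgt
    rw [if_neg (by simpa using htD)] at hgt
    have hg0t : pvGet g0 t.1 t.2 = some 1 := by rw [← hgt, hcase]
    have hott0 : pvHot n m g0 t = true :=
      decide_eq_true ⟨hb.1, hb.2.1, hb.2.2.1, hb.2.2.2, hg0t⟩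
    have hott : pvHot n m st.1 t = true :=
      decide_eq_true ⟨hb.1, hb.2.1, hb.2.2.1, hb.2.2.2, hcase⟩
    obtain ⟨ansmem, ansnd, gridchar⟩ := pvFind_char n m st.1 t hott
    have hreq : ∀ x, pvReach n m st.1 t x ↔ pvReach n m g0 t x :=
      reach_eq_of_closed n m g0 st.1 D hDhot hcl hgrid t htD hott0
    have hcell : pvCellA n m st t.1 t.2
        = ((pvFind st.1 n m t.1 t.2).2,
           pvMarkA m (((pvFind st.1 n m t.1 t.2).1.length : Int)) (pvFind st.1 n m t.1 t.2).1 st.2) := by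
      unfold pvCellA
      rw [if_pos hcase]
    have anshot : ∀ x ∈ (pvFind st.1 n m t.1 t.2).1, pvHot n m g0 x = true := by
      intro x hx
      have := pvFind_all_hot n m st.1 t hott x hx
      rw [pvHot_of_inv n m g0 st.1 D hDhot hgrid] at this
      exact (Bool.and_eq_true_iff.mp this).1
    have ansnotD : ∀ x ∈ (pvFind st.1 n m t.1 t.2).1, x ∉ D := by
      intro x hx
      have := pvFind_all_hot n m st.1 t hott x hx
      rw [pvHot_of_inv n m g0 st.1 D hDhot hgrid] at this
      have := (Bool.and_eq_true_iff.mp this).2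
      intro hmem
      simp [hmem] at this
    have ansmem0 : ∀ x, x ∈ (pvFind st.1 n m t.1 t.2).1 ↔ pvReach n m g0 t x :=
      fun x => (ansmem x).trans (hreq x)
    refine ⟨D ++ (pvFind st.1 n m t.1 t.2).1, ⟨?_, ?_, ?_, ?_, ?_, ?_⟩, ?_, ?_⟩
    · exact List.Nodup.append hnd ansnd (fun x hxD hxans => ansnotD x hxans hxD)
    · intro p hp
      rcases List.mem_append.mp hp with h | h
      · exact hDhot p h
      · exact anshot p h
    · intro p hp x hr
      rcases List.mem_append.mp hp with h | h
      · exact List.mem_append_left _ (hcl p h x hr)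
      · refine List.mem_append_right _ ((ansmem0 x).mpr ?_)
        exact Relation.ReflTransGen.trans ((ansmem0 p).mp h) hr
    · intro i j hi hj
      rw [hcell]
      have := gridchar i j hi hj
      rw [this, hgrid i j hi hj]
      by_cases hxans : pvReach n m st.1 t (i, j)
      · rw [pvIf_pos hxans,
          if_pos (List.mem_append_right _ ((ansmem (i, j)).mpr hxans))]
      · rw [pvIf_neg hxans]
        have hnotans : (i, j) ∉ (pvFind st.1 n m t.1 t.2).1 :=
          fun h => hxans ((ansmem _).mp h)
        by_cases hmem : (i, j) ∈ D
        · rw [if_pos (by simpa using hmem), if_pos (List.mem_append_left _ hmem)]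
        · rw [if_neg (by simpa using hmem),
            if_neg (by
              intro h
              rcases List.mem_append.mp h with h1 | h1
              · exact hmem h1
              · exact hnotans h1)]
    · rw [hcell]
      have hcb : ∀ p ∈ (pvFind st.1 n m t.1 t.2).1, 0 ≤ p.2 ∧ p.2 < m := by
        intro p hp
        have := pvHot_ok (anshot p hp)
        exact ⟨this.2.2.1, this.2.2.2.1⟩
      rw [pvMarkA_eq m _ _ st.2 (by omega) hcb]
      rw [foldAddAt_length _ _ st.2 (by
        intro c hc
        obtain ⟨p, hp, hpc⟩ := List.mem_map.mp ((PySem.List.mem_dedup _ c).mp hc)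
        exact hpc ▸ (hcb p hp).1)]
      exact hlen
    · intro c hcm
      rw [hcell]
      have hcb : ∀ p ∈ (pvFind st.1 n m t.1 t.2).1, 0 ≤ p.2 ∧ p.2 < m := by
        intro p hp
        have := pvHot_ok (anshot p hp)
        exact ⟨this.2.2.1, this.2.2.2.1⟩
      rw [pvMarkA_eq m _ _ st.2 (by omega) hcb]
      rw [foldAddAt_getD _ _ st.2 (PySem.List.nodup_dedup _)
        (by
          intro x hx
          obtain ⟨p, hp, hpc⟩ := List.mem_map.mp ((PySem.List.mem_dedup _ x).mp hx)
          exact hpc ▸ (hcb p hp).1) c (by omega)]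
      rw [hls c hcm]
      have hmemcols : ((c : Int) ∈ PySem.List.dedup ((pvFind st.1 n m t.1 t.2).1.map (fun p => p.2)))
          ↔ pvTouch n m g0 t ((c : Int)) := by
        rw [PySem.List.mem_dedup]
        constructor
        · intro h
          obtain ⟨p, hp, hpc⟩ := List.mem_map.mp h
          exact ⟨p, (ansmem0 p).mp hp, hpc⟩
        · rintro ⟨x, hr, hx⟩
          exact List.mem_map.mpr ⟨x, (ansmem0 x).mpr hr, hx⟩
      have hNT : pvNT n m g0 (D ++ (pvFind st.1 n m t.1 t.2).1) ((c : Int))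
          = pvNT n m g0 D ((c : Int))
            + ((pvFind st.1 n m t.1 t.2).1.length : Int) * pvInd (pvTouch n m g0 t ((c : Int))) := by
        unfold pvNT
        rw [List.map_append, List.sum_append]
        congr 1
        have hconst : ((pvFind st.1 n m t.1 t.2).1.map (fun p => pvInd (pvTouch n m g0 p ((c : Int)))))
            = ((pvFind st.1 n m t.1 t.2).1.map (fun _ => pvInd (pvTouch n m g0 t ((c : Int))))) := by
          apply List.map_congr_left
          intro p hp
          apply pvInd_congr
          have hrp : pvReach n m g0 t p := (ansmem0 p).mp hp
          have hsym : pvReach n m g0 p t := reach_symm hott0 hrp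
          constructor
          · rintro ⟨x, hr, hx⟩
            exact ⟨x, Relation.ReflTransGen.trans hrp hr, hx⟩
          · rintro ⟨x, hr, hx⟩
            exact ⟨x, Relation.ReflTransGen.trans hsym hr, hx⟩
        rw [hconst, PySem.List.sum_map_const_int]
      rw [hNT]
      by_cases htouch : pvTouch n m g0 t ((c : Int))
      · rw [if_pos (hmemcols.mpr htouch), pvInd_pos htouch]
        ring
      · rw [if_neg (fun h => htouch (hmemcols.mp h)), pvInd_neg htouch]
        ring
    · exact fun p hp => List.mem_append_left _ hp
    · intro _
      exact List.mem_append_right _ ((ansmem0 t).mpr Relation.ReflTransGen.refl)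
  · have hcell : pvCellA n m st t.1 t.2 = st := by
      unfold pvCellA
      rw [if_neg hcase]
    refine ⟨D, by rw [hcell]; exact ⟨hnd, hDhot, hcl, hgrid, hlen, hls⟩, fun p hp => hp, ?_⟩
    intro hhot
    have hg0t := (pvHot_ok hhot).2.2.2.2
    have hgt := hgrid t.1 t.2 hb.1 hb.2.2.1
    by_cases hmem : t ∈ D
    · exact hmem
    · rw [if_neg (by simpa using hmem), hg0t] at hgt
      exact absurd hgt hcase

theorem pvFoldA (n m : Int) (g0 : List (List Int)) :
    ∀ (cells : List (Int × Int)) (st : List (List Int) × List Int) (D : List (Int × Int)),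
      (∀ t ∈ cells, 0 ≤ t.1 ∧ t.1 < n ∧ 0 ≤ t.2 ∧ t.2 < m) →
      pvInvA n m g0 st D →
      ∃ D', pvInvA n m g0 (cells.foldl (fun st t => pvCellA n m st t.1 t.2) st) D' ∧
        (∀ p ∈ D, p ∈ D') ∧ (∀ t ∈ cells, pvHot n m g0 t = true → t ∈ D') := by
  intro cells
  induction cells with
  | nil => intro st D _ hinv; exact ⟨D, hinv, fun p hp => hp, by simp⟩
  | cons t rest ih =>
    intro st D hbs hinv
    obtain ⟨D1, hinv1, hsub1, ht1⟩ :=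
      pvCellA_step n m g0 st D t (hbs t List.mem_cons_self) hinv
    obtain ⟨D', hinv', hsub', hall'⟩ :=
      ih (pvCellA n m st t.1 t.2) D1 (fun t ht => hbs t (List.mem_cons_of_mem _ ht)) hinv1
    refine ⟨D', hinv', fun p hp => hsub' p (hsub1 p hp), ?_⟩
    intro x hx hhot
    rcases List.mem_cons.mp hx with h | h
    · subst h; exact hsub' x (ht1 hhot)
    · exact hall' x h hhot

theorem foldl_nested {σ : Type} (n m : Int) (f : σ → Int → Int → σ) (init : σ) :
    (PySem.List.pyRange 0 n 1).foldl
      (fun s i => (PySem.List.pyRange 0 m 1).foldl (fun s j => f s i j) s) init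
      = (pvCells n m).foldl (fun s t => f s t.1 t.2) init := by
  unfold pvCells
  rw [List.foldl_flatMap]
  congr 1
  funext s i
  simp only [List.foldl_map]

theorem solutionA_char (land : List (List Int)) :
    ((PySem.List.pyRange 0 ((land.length : Int)) 1).foldl
      (fun st i => (PySem.List.pyRange 0 (((land.headI).length : Int)) 1).foldl
        (fun st j => pvCellA (land.length : Int) ((land.headI).length : Int) st i j) st)
      (land, List.replicate ((land.headI).length : Int).toNat 0)).2.length
        = ((land.headI).length : Int).toNat
    ∧ ∀ t : Nat, t < ((land.headI).length : Int).toNat →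
      ((PySem.List.pyRange 0 ((land.length : Int)) 1).foldl
        (fun st i => (PySem.List.pyRange 0 (((land.headI).length : Int)) 1).foldl
          (fun st j => pvCellA (land.length : Int) ((land.headI).length : Int) st i j) st)
        (land, List.replicate ((land.headI).length : Int).toNat 0)).2.getD t 0
        = pvNT (land.length : Int) ((land.headI).length : Int) land
            (pvO (land.length : Int) ((land.headI).length : Int) land) ((t : Int)) := by
  set n : Int := (land.length : Int)
  set m : Int := ((land.headI).length : Int)
  have hconv : (PySem.List.pyRange 0 n 1).foldl
      (fun st i => (PySem.List.pyRange 0 m 1).foldl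
        (fun st j => pvCellA n m st i j) st)
      (land, List.replicate m.toNat 0)
      = (pvCells n m).foldl (fun st t => pvCellA n m st t.1 t.2)
          (land, List.replicate m.toNat 0) :=
    foldl_nested n m (pvCellA n m) (land, List.replicate m.toNat 0)
  have hinv0 : pvInvA n m land (land, List.replicate m.toNat 0) [] := by
    refine ⟨List.nodup_nil, by simp, by simp, ?_, by simp, ?_⟩
    · intro i j _ _
      rw [if_neg (by simp)]
    · intro t ht
      rw [List.getD_eq_getElem?_getD, List.getElem?_replicate, if_pos ht]
      simp [pvNT]
  obtain ⟨D', hinv', _, hall'⟩ := pvFoldA n m land (pvCells n m)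
    (land, List.replicate m.toNat 0) []
    (fun t ht => mem_pvCells.mp ht) hinv0
  obtain ⟨hnd', hhot', _, _, hlen', hls'⟩ := hinv'
  have hperm : D'.Perm (pvO n m land) := by
    rw [List.perm_ext_iff_of_nodup hnd' (nodup_pvO n m land)]
    intro x
    rw [mem_pvO]
    constructor
    · exact fun h => hhot' x h
    · intro h
      have hb := pvHot_ok h
      exact hall' x (mem_pvCells.mpr ⟨hb.1, hb.2.1, hb.2.2.1, hb.2.2.2.1⟩) h
  have hNTeq : ∀ c : Int, pvNT n m land D' c = pvNT n m land (pvO n m land) c := by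
    intro c
    unfold pvNT
    exact (hperm.map _).sum_eq
  rw [hconv]
  exact ⟨hlen', fun t ht => (hls' t ht).trans (hNTeq _)⟩


-- ---------- equivalence-closure algebra for the relabelling union ----------

theorem eqvGen_insert {α : Type} (R : α → α → Prop) (p q : α) (x y : α) :
    Relation.EqvGen (fun a b => R a b ∨ (a = p ∧ b = q)) x y ↔
      Relation.EqvGen R x y ∨
      (Relation.EqvGen R x p ∧ Relation.EqvGen R q y) ∨
      (Relation.EqvGen R x q ∧ Relation.EqvGen R p y) := by
  constructor
  · intro h
    induction h with
    | rel a b hab =>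
      rcases hab with h | ⟨h1, h2⟩
      · exact Or.inl (Relation.EqvGen.rel _ _ h)
      · subst h1; subst h2
        exact Or.inr (Or.inl ⟨Relation.EqvGen.refl _, Relation.EqvGen.refl _⟩)
    | refl a => exact Or.inl (Relation.EqvGen.refl _)
    | symm a b _ ih =>
      rcases ih with h | ⟨h1, h2⟩ | ⟨h1, h2⟩
      · exact Or.inl (Relation.EqvGen.symm _ _ h)
      · exact Or.inr (Or.inr ⟨Relation.EqvGen.symm _ _ h2, Relation.EqvGen.symm _ _ h1⟩)
      · exact Or.inr (Or.inl ⟨Relation.EqvGen.symm _ _ h2, Relation.EqvGen.symm _ _ h1⟩)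
    | trans a b c _ _ ih1 ih2 =>
      rcases ih1 with h1 | ⟨h1, h2⟩ | ⟨h1, h2⟩ <;>
        rcases ih2 with h3 | ⟨h3, h4⟩ | ⟨h3, h4⟩
      · exact Or.inl (Relation.EqvGen.trans _ _ _ h1 h3)
      · exact Or.inr (Or.inl ⟨Relation.EqvGen.trans _ _ _ h1 h3, h4⟩)
      · exact Or.inr (Or.inr ⟨Relation.EqvGen.trans _ _ _ h1 h3, h4⟩)
      · exact Or.inr (Or.inl ⟨h1, Relation.EqvGen.trans _ _ _ h2 h3⟩)
      · exact Or.inl (Relation.EqvGen.trans _ _ _ h1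
          (Relation.EqvGen.trans _ _ _ (Relation.EqvGen.symm _ _ (Relation.EqvGen.trans _ _ _ h2 h3)) h4))
      · exact Or.inl (Relation.EqvGen.trans _ _ _ h1 h4)
      · exact Or.inr (Or.inr ⟨h1, Relation.EqvGen.trans _ _ _ h2 h3⟩)
      · exact Or.inl (Relation.EqvGen.trans _ _ _ h1 h4)
      · exact Or.inl (Relation.EqvGen.trans _ _ _ h1
          (Relation.EqvGen.trans _ _ _ (Relation.EqvGen.symm _ _ (Relation.EqvGen.trans _ _ _ h2 h3)) h4))
  · intro h
    have hmono : ∀ u w, Relation.EqvGen R u w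
        → Relation.EqvGen (fun a b => R a b ∨ (a = p ∧ b = q)) u w :=
      fun u w => Relation.EqvGen.mono (fun a b hab => Or.inl hab)
    have hedge : Relation.EqvGen (fun a b => R a b ∨ (a = p ∧ b = q)) p q :=
      Relation.EqvGen.rel _ _ (Or.inr ⟨rfl, rfl⟩)
    rcases h with h | ⟨h1, h2⟩ | ⟨h1, h2⟩
    · exact hmono _ _ h
    · exact Relation.EqvGen.trans _ _ _ (hmono _ _ h1)
        (Relation.EqvGen.trans _ _ _ hedge (hmono _ _ h2))
    · exact Relation.EqvGen.trans _ _ _ (hmono _ _ h1)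
        (Relation.EqvGen.trans _ _ _ (Relation.EqvGen.symm _ _ hedge) (hmono _ _ h2))

theorem eqvGen_congr {α : Type} {R R' : α → α → Prop} (h : ∀ a b, R a b ↔ R' a b) (x y : α) :
    Relation.EqvGen R x y ↔ Relation.EqvGen R' x y :=
  ⟨Relation.EqvGen.mono (fun a b hab => (h a b).mp hab),
   Relation.EqvGen.mono (fun a b hab => (h a b).mpr hab)⟩

theorem eqvGen_bot {α : Type} (x y : α) :
    Relation.EqvGen (fun _ _ => False) x y ↔ x = y := by
  constructor
  · intro h
    induction h with
    | rel a b hab => exact absurd hab id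
    | refl a => rfl
    | symm a b _ ih => exact ih.symm
    | trans a b c _ _ ih1 ih2 => exact ih1.trans ih2
  · rintro rfl
    exact Relation.EqvGen.refl _

theorem relabel_eq {α : Type} [DecidableEq α] (a b : α) (_hab : a ≠ b) (x y : α) :
    ((if x = b then a else x) = (if y = b then a else y))
      ↔ (x = y ∨ (x = a ∧ y = b) ∨ (x = b ∧ y = a)) := by
  by_cases hx : x = b <;> by_cases hy : y = b
  all_goals simp [hx, hy]
  all_goals tauto

-- ---------- indicator-sum bookkeeping ----------

theorem sum_ind_mem {α : Type} (S : List α) (hnd : S.Nodup) (x : α) :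
    (S.map (fun w => pvInd (w = x))).sum = pvInd (x ∈ S) := by
  induction S with
  | nil => simp [pvInd_neg]
  | cons w rest ih =>
    rw [List.nodup_cons] at hnd
    rw [List.map_cons, List.sum_cons, ih hnd.2]
    by_cases hwx : w = x
    · subst hwx
      rw [pvInd_pos rfl, pvInd_neg hnd.1, pvInd_pos List.mem_cons_self]
      omega
    · rw [pvInd_neg hwx]
      by_cases hmem : x ∈ rest
      · rw [pvInd_pos hmem, pvInd_pos (List.mem_cons_of_mem _ hmem)]
        omega
      · rw [pvInd_neg hmem, pvInd_neg (by
          intro h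
          rcases List.mem_cons.mp h with h | h
          · exact hwx h.symm
          · exact hmem h)]
        omega

theorem sum_ind_count {α β : Type} (L : List β) (v : β → α) (r : α) [DecidableEq α] :
    (L.map (fun p => pvInd (r = v p))).sum = ((L.map v).count r : Int) := by
  induction L with
  | nil => simp
  | cons p rest ih =>
    rw [List.map_cons, List.sum_cons, ih, List.map_cons, List.count_cons]
    by_cases h : r = v p
    · rw [pvInd_pos h, if_pos (by simp [h])]
      push_cast
      omega
    · rw [pvInd_neg h, if_neg (by simp; exact fun he => h he.symm)]
      push_cast
      omega

theorem sum_swap_int {α β : Type} (L : List α) (S : List β) (f : α → β → Int) :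
    (L.map (fun p => (S.map (f p)).sum)).sum = (S.map (fun w => (L.map (fun p => f p w)).sum)).sum := by
  induction L with
  | nil => simp
  | cons p rest ih =>
    rw [List.map_cons, List.sum_cons, ih, ← PySem.List.sum_map_add_int]
    rfl


-- ---------- B: building the initial label dict ----------

theorem foldInsert_items (n m : Int) (g0 : List (List Int)) :
    ∀ (cells : List (Int × Int)) (d : PySem.Dict (Int × Int) (Int × Int)),
      cells.Nodup →
      (∀ p ∈ cells, 0 ≤ p.1 ∧ p.1 < n ∧ 0 ≤ p.2 ∧ p.2 < m) →
      (∀ p ∈ cells, d.contains p = false) →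
      (cells.foldl (fun d t => if pvGet g0 t.1 t.2 = some 1 then d.insert t t else d) d).items
        = d.items ++ (cells.filter (fun p => pvHot n m g0 p)).map (fun p => (p, p)) := by
  intro cells
  induction cells with
  | nil => intro d _ _ _; simp
  | cons t rest ih =>
    intro d hnd hb hcon
    rw [List.nodup_cons] at hnd
    have hbt := hb t List.mem_cons_self
    rw [List.foldl_cons]
    by_cases hget : pvGet g0 t.1 t.2 = some 1
    · have hhot : pvHot n m g0 t = true :=
        decide_eq_true ⟨hbt.1, hbt.2.1, hbt.2.2.1, hbt.2.2.2, hget⟩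
      rw [if_pos hget]
      rw [ih (d.insert t t) hnd.2 (fun p hp => hb p (List.mem_cons_of_mem _ hp))
        (by
          intro p hp
          rw [PySem.Dict.contains_insert]
          have : (p == t) = false := by
            simp
            exact fun he => hnd.1 (he ▸ hp)
          rw [this, hcon p (List.mem_cons_of_mem _ hp)]
          rfl)]
      rw [PySem.Dict.items_insert_of_not_contains d t (hcon t List.mem_cons_self)]
      rw [List.filter_cons_of_pos hhot, List.map_cons, List.append_assoc]
      rfl
    · have hhot : pvHot n m g0 t = false := by
        apply decide_eq_false
        rintro ⟨_, _, _, _, h5⟩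
        exact hget h5
      rw [if_neg hget]
      rw [ih d hnd.2 (fun p hp => hb p (List.mem_cons_of_mem _ hp))
        (fun p hp => hcon p (List.mem_cons_of_mem _ hp))]
      rw [List.filter_cons_of_neg (by simp [hhot])]

theorem label0_char (n m : Int) (g0 : List (List Int)) :
    ((PySem.List.pyRange 0 n 1).foldl (fun d i => (PySem.List.pyRange 0 m 1).foldl
        (fun d j => if pvGet g0 i j = some 1 then d.insert (i, j) (i, j) else d) d)
      (PySem.Dict.empty : PySem.Dict (Int × Int) (Int × Int))).items
      = (pvO n m g0).map (fun p => (p, p)) := by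
  rw [foldl_nested n m
    (fun d i j => if pvGet g0 i j = some 1 then d.insert (i, j) (i, j) else d)
    (PySem.Dict.empty : PySem.Dict (Int × Int) (Int × Int))]
  have hfun : (fun (d : PySem.Dict (Int × Int) (Int × Int)) (t : Int × Int) =>
        if pvGet g0 t.1 t.2 = some 1 then d.insert (t.1, t.2) (t.1, t.2) else d)
      = (fun d t => if pvGet g0 t.1 t.2 = some 1 then d.insert t t else d) := by
    funext d t
    rw [Prod.mk.eta]
  rw [hfun]
  rw [foldInsert_items n m g0 (pvCells n m) PySem.Dict.empty (nodup_pvCells n m)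
    (fun p hp => mem_pvCells.mp hp) (fun p _ => rfl)]
  rfl

theorem keys_of_items (lab : PySem.Dict (Int × Int) (Int × Int)) (O : List (Int × Int))
    (v : Int × Int → Int × Int) (h : lab.items = O.map (fun p => (p, v p))) :
    lab.keys = O := by
  have hk : lab.keys = lab.items.map Prod.fst := rfl
  rw [hk, h, List.map_map]
  exact List.map_id _

-- ---------- B: processing the right/down edges by relabelling ----------

def pvCand (O : List (Int × Int)) : List ((Int × Int) × (Int × Int)) :=
  O.flatMap (fun p => [(p.1, p.2 + 1), (p.1 + 1, p.2)].map (fun nb => (p, nb)))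

theorem mem_pvCand {O : List (Int × Int)} {e : (Int × Int) × (Int × Int)} :
    e ∈ pvCand O ↔ e.1 ∈ O ∧ (e.2 = (e.1.1, e.1.2 + 1) ∨ e.2 = (e.1.1 + 1, e.1.2)) := by
  unfold pvCand
  rw [List.mem_flatMap]
  constructor
  · rintro ⟨p, hp, hmem⟩
    simp at hmem
    rcases hmem with h | h <;> subst h
    · exact ⟨hp, Or.inl rfl⟩
    · exact ⟨hp, Or.inr rfl⟩
  · rintro ⟨h1, h2 | h2⟩
    · exact ⟨e.1, h1, by simp [← h2]⟩
    · exact ⟨e.1, h1, by simp [← h2]⟩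

def pvERel (O : List (Int × Int)) (C : List ((Int × Int) × (Int × Int)))
    (a b : Int × Int) : Prop := (a, b) ∈ C ∧ b ∈ O

def pvLabInv (O : List (Int × Int)) (C : List ((Int × Int) × (Int × Int)))
    (lab : PySem.Dict (Int × Int) (Int × Int)) (v : Int × Int → Int × Int) : Prop :=
  lab.items = O.map (fun p => (p, v p)) ∧
  ∀ p q, p ∈ O → q ∈ O → (v p = v q ↔ Relation.EqvGen (pvERel O C) p q)

theorem eRel_append (O : List (Int × Int)) (C : List ((Int × Int) × (Int × Int)))
    (e : (Int × Int) × (Int × Int)) (heO : e.2 ∈ O) (a b : Int × Int) :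
    pvERel O (C ++ [e]) a b ↔ pvERel O C a b ∨ (a = e.1 ∧ b = e.2) := by
  unfold pvERel
  rw [List.mem_append]
  constructor
  · rintro ⟨h1 | h1, h2⟩
    · exact Or.inl ⟨h1, h2⟩
    · simp at h1
      exact Or.inr ⟨congrArg Prod.fst h1, congrArg Prod.snd h1⟩
  · rintro (⟨h1, h2⟩ | ⟨h1, h2⟩)
    · exact ⟨Or.inl h1, h2⟩
    · subst h1; subst h2
      exact ⟨Or.inr (by simp), heO⟩

theorem eRel_append_dead (O : List (Int × Int)) (C : List ((Int × Int) × (Int × Int)))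
    (e : (Int × Int) × (Int × Int)) (heO : e.2 ∉ O) (a b : Int × Int) :
    pvERel O (C ++ [e]) a b ↔ pvERel O C a b := by
  unfold pvERel
  rw [List.mem_append]
  constructor
  · rintro ⟨h1 | h1, h2⟩
    · exact ⟨h1, h2⟩
    · simp at h1
      have : b = e.2 := congrArg Prod.snd h1
      exact absurd (this ▸ h2) heO
  · rintro ⟨h1, h2⟩
    exact ⟨Or.inl h1, h2⟩

theorem union_step (O : List (Int × Int)) (hOnd : O.Nodup)
    (C : List ((Int × Int) × (Int × Int))) (lab : PySem.Dict (Int × Int) (Int × Int))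
    (v : Int × Int → Int × Int) (e : (Int × Int) × (Int × Int)) (he : e.1 ∈ O)
    (hinv : pvLabInv O C lab v) :
    ∃ v', pvLabInv O (C ++ [e]) (pvUnionNb lab e.1 e.2) v' := by
  obtain ⟨hitems, hchar⟩ := hinv
  have hkeys : lab.keys = O := keys_of_items lab O v hitems
  have hknd : lab.keys.Nodup := hkeys ▸ hOnd
  have hgetD : ∀ p ∈ O, lab.getD p (0, 0) = v p := by
    intro p hp
    exact PySem.Dict.getD_of_mem_items lab
      (by rw [hitems]; exact List.mem_map.mpr ⟨p, hp, rfl⟩) hknd (0, 0)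
  by_cases hnb : e.2 ∈ O
  · have hcon : lab.contains e.2 = true := (PySem.Dict.contains_iff_mem_keys lab e.2).mpr
      (hkeys ▸ hnb)
    have hpq : ∀ x y, (Relation.EqvGen (pvERel O (C ++ [e])) x y ↔
        Relation.EqvGen (fun a b => pvERel O C a b ∨ (a = e.1 ∧ b = e.2)) x y) :=
      fun x y => eqvGen_congr (eRel_append O C e hnb) x y
    by_cases hab : lab.getD e.1 (0, 0) == lab.getD e.2 (0, 0)
    · have haeqb : v e.1 = v e.2 := by
        rw [← hgetD e.1 he, ← hgetD e.2 hnb]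
        exact beq_iff_eq.mp hab
      have heqv : Relation.EqvGen (pvERel O C) e.1 e.2 := (hchar e.1 e.2 he hnb).mp haeqb
      refine ⟨v, ?_, ?_⟩
      · show (pvUnionNb lab e.1 e.2).items = _
        unfold pvUnionNb
        rw [if_pos hcon, if_pos hab]
        exact hitems
      · intro p q hp hq
        rw [hchar p q hp hq, hpq p q, eqvGen_insert]
        constructor
        · exact Or.inl
        · rintro (h | ⟨h1, h2⟩ | ⟨h1, h2⟩)
          · exact h
          · exact Relation.EqvGen.trans _ _ _ h1 (Relation.EqvGen.trans _ _ _ heqv h2)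
          · exact Relation.EqvGen.trans _ _ _ h1
              (Relation.EqvGen.trans _ _ _ (Relation.EqvGen.symm _ _ heqv) h2)
    · have hne : v e.1 ≠ v e.2 := by
        intro hv
        apply hab
        rw [hgetD e.1 he, hgetD e.2 hnb, hv]
        exact beq_self_eq_true _
      refine ⟨fun x => if v x = v e.2 then v e.1 else v x, ?_, ?_⟩
      · show (pvUnionNb lab e.1 e.2).items = _
        unfold pvUnionNb
        rw [if_pos hcon, if_neg (by simpa using hab)]
        unfold pvRelabel
        show (lab.items.map _) = _
        rw [hitems, List.map_map]
        apply List.map_congr_left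
        intro p _
        simp only [Function.comp]
        rw [hgetD e.1 he, hgetD e.2 hnb]
        by_cases hvp : v p = v e.2
        · rw [if_pos (by simpa using hvp), if_pos hvp]
        · rw [if_neg (by simpa using hvp), if_neg hvp]
      · intro p q hp hq
        have := relabel_eq (v e.1) (v e.2) hne (v p) (v q)
        rw [this]
        rw [hpq p q, eqvGen_insert]
        rw [hchar p q hp hq]
        have h1 : (v p = v e.1 ↔ Relation.EqvGen (pvERel O C) p e.1) := hchar p e.1 hp he
        have h2 : (v q = v e.2 ↔ Relation.EqvGen (pvERel O C) q e.2) := hchar q e.2 hq hnb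
        have h3 : (v p = v e.2 ↔ Relation.EqvGen (pvERel O C) p e.2) := hchar p e.2 hp hnb
        have h4 : (v q = v e.1 ↔ Relation.EqvGen (pvERel O C) q e.1) := hchar q e.1 hq he
        rw [h1, h2, h3, h4]
        constructor
        · rintro (h | ⟨ha, hb⟩ | ⟨ha, hb⟩)
          · exact Or.inl h
          · exact Or.inr (Or.inl ⟨ha, Relation.EqvGen.symm _ _ hb⟩)
          · exact Or.inr (Or.inr ⟨ha, Relation.EqvGen.symm _ _ hb⟩)
        · rintro (h | ⟨ha, hb⟩ | ⟨ha, hb⟩)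
          · exact Or.inl h
          · exact Or.inr (Or.inl ⟨ha, Relation.EqvGen.symm _ _ hb⟩)
          · exact Or.inr (Or.inr ⟨ha, Relation.EqvGen.symm _ _ hb⟩)
  · have hcon : lab.contains e.2 = false := by
      have := PySem.Dict.contains_iff_mem_keys lab e.2
      rw [hkeys] at this
      cases h : lab.contains e.2
      · rfl
      · exact absurd (this.mp h) hnb
    refine ⟨v, ?_, ?_⟩
    · show (pvUnionNb lab e.1 e.2).items = _
      unfold pvUnionNb
      rw [if_neg (by simp [hcon])]
      exact hitems
    · intro p q hp hq
      rw [hchar p q hp hq]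
      exact (eqvGen_congr (eRel_append_dead O C e hnb) p q).symm

theorem union_fold (O : List (Int × Int)) (hOnd : O.Nodup) :
    ∀ (cand : List ((Int × Int) × (Int × Int))) (C : List ((Int × Int) × (Int × Int)))
      (lab : PySem.Dict (Int × Int) (Int × Int)) (v : Int × Int → Int × Int),
      (∀ e ∈ cand, e.1 ∈ O) → pvLabInv O C lab v →
      ∃ v', pvLabInv O (C ++ cand)
        (cand.foldl (fun lab e => pvUnionNb lab e.1 e.2) lab) v' := by
  intro cand
  induction cand with
  | nil => intro C lab v _ hinv; exact ⟨v, by simpa using hinv⟩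
  | cons e rest ih =>
    intro C lab v hall hinv
    obtain ⟨v1, hinv1⟩ := union_step O hOnd C lab v e (hall e List.mem_cons_self) hinv
    obtain ⟨v', hinv'⟩ := ih (C ++ [e]) (pvUnionNb lab e.1 e.2) v1
      (fun e' he' => hall e' (List.mem_cons_of_mem _ he')) hinv1
    refine ⟨v', ?_⟩
    rw [List.append_assoc] at hinv'
    simpa using hinv'

theorem foldUnion_conv (O : List (Int × Int)) (lab0 : PySem.Dict (Int × Int) (Int × Int)) :
    O.foldl (fun lab p => [(p.1, p.2 + 1), (p.1 + 1, p.2)].foldl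
        (fun lab nb => pvUnionNb lab p nb) lab) lab0
      = (pvCand O).foldl (fun lab e => pvUnionNb lab e.1 e.2) lab0 := by
  unfold pvCand
  rw [List.foldl_flatMap]
  congr 1


-- ---------- right/down edges generate exactly the component relation ----------

theorem eqvGen_cand_aux (n m : Int) (g0 : List (List Int)) {x y : Int × Int}
    (h : Relation.EqvGen (pvERel (pvO n m g0) (pvCand (pvO n m g0))) x y) :
    pvReach n m g0 x y ∧ (x = y ∨ (x ∈ pvO n m g0 ∧ y ∈ pvO n m g0)) := by
  induction h with
  | rel a b hab =>
    obtain ⟨hC, hbO⟩ := hab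
    have hm := mem_pvCand.mp hC
    refine ⟨Relation.ReflTransGen.single ⟨?_, mem_pvO.mp hbO⟩, Or.inr ⟨hm.1, hbO⟩⟩
    rcases hm.2 with h | h <;> (rw [show ((a, b).2 : Int × Int) = b from rfl] at h) <;>
      rw [h] <;> simp [pvAdj]
  | refl a => exact ⟨Relation.ReflTransGen.refl, Or.inl rfl⟩
  | symm a b _ ih =>
    obtain ⟨r, hm⟩ := ih
    rcases hm with h | ⟨h1, h2⟩
    · subst h
      exact ⟨Relation.ReflTransGen.refl, Or.inl rfl⟩
    · exact ⟨reach_symm (mem_pvO.mp h1) r, Or.inr ⟨h2, h1⟩⟩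
  | trans a b c _ _ ih1 ih2 =>
    obtain ⟨r1, hm1⟩ := ih1
    obtain ⟨r2, hm2⟩ := ih2
    refine ⟨Relation.ReflTransGen.trans r1 r2, ?_⟩
    rcases hm1 with h | ⟨h1, h2⟩
    · subst h
      exact hm2
    · rcases hm2 with h | ⟨h3, h4⟩
      · subst h
        exact Or.inr ⟨h1, h2⟩
      · exact Or.inr ⟨h1, h4⟩

theorem reach_eqvGen_cand (n m : Int) (g0 : List (List Int)) {p x : Int × Int}
    (hp : p ∈ pvO n m g0) (r : pvReach n m g0 p x) :
    Relation.EqvGen (pvERel (pvO n m g0) (pvCand (pvO n m g0))) p x := by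
  induction r with
  | refl => exact Relation.EqvGen.refl _
  | @tail y x' r' step ih =>
    have hyO : y ∈ pvO n m g0 := by
      rcases reach_target r' with h | h
      · exact h ▸ hp
      · exact mem_pvO.mpr h
    have hxO : x' ∈ pvO n m g0 := mem_pvO.mpr step.2
    have hadj := step.1
    simp only [pvAdj, List.mem_cons, List.not_mem_nil, or_false] at hadj
    rcases hadj with h | h | h | h
    · exact Relation.EqvGen.trans _ _ _ ih
        (Relation.EqvGen.rel _ _ ⟨mem_pvCand.mpr ⟨hyO, Or.inl h⟩, hxO⟩)
    · exact Relation.EqvGen.trans _ _ _ ih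
        (Relation.EqvGen.rel _ _ ⟨mem_pvCand.mpr ⟨hyO, Or.inr h⟩, hxO⟩)
    · have hy : y = (x'.1, x'.2 + 1) := by
        rw [h]
        cases y with
        | mk a b =>
          rw [Prod.mk.injEq]
          refine ⟨rfl, by omega⟩
      refine Relation.EqvGen.trans _ _ _ ih (Relation.EqvGen.symm _ _
        (Relation.EqvGen.rel _ _ ⟨mem_pvCand.mpr ⟨hxO, Or.inl ?_⟩, hyO⟩))
      rw [show ((x', y).2 : Int × Int) = y from rfl, show ((x', y).1 : Int × Int) = x' from rfl, hy]
    · have hy : y = (x'.1 + 1, x'.2) := by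
        rw [h]
        cases y with
        | mk a b =>
          rw [Prod.mk.injEq]
          refine ⟨by omega, rfl⟩
      refine Relation.EqvGen.trans _ _ _ ih (Relation.EqvGen.symm _ _
        (Relation.EqvGen.rel _ _ ⟨mem_pvCand.mpr ⟨hxO, Or.inr ?_⟩, hyO⟩))
      rw [show ((x', y).2 : Int × Int) = y from rfl, show ((x', y).1 : Int × Int) = x' from rfl, hy]

theorem eqvGen_cand_iff_reach (n m : Int) (g0 : List (List Int)) {p q : Int × Int}
    (hp : p ∈ pvO n m g0) :
    Relation.EqvGen (pvERel (pvO n m g0) (pvCand (pvO n m g0))) p q ↔ pvReach n m g0 p q :=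
  ⟨fun h => (eqvGen_cand_aux n m g0 h).1, reach_eqvGen_cand n m g0 hp⟩

-- ---------- B: class sizes and the credit-once-per-column loop ----------

def pvColSum (S : PySem.Dict (Int × Int) Int) (pairs : List ((Int × Int) × Int)) (c : Int) : Int :=
  (((PySem.Set.ofList pairs).filter (fun rj => rj.2 == c)).map (fun rj => S.getD rj.1 0)).sum

theorem foldTotals (m : Int) (S : PySem.Dict (Int × Int) Int) (v : Int × Int → Int × Int) :
    ∀ (P P0 : List (Int × Int)) (ls : List Int),
      ls.length = m.toNat →
      (∀ p ∈ P, 0 ≤ p.2 ∧ p.2 < m) →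
      (∀ t : Nat, t < m.toNat →
        ls.getD t 0 = pvColSum S (P0.map (fun p => (v p, p.2))) ((t : Int))) →
      (((P.map (fun p => (p, v p))).foldl
          (fun (st : List Int × PySem.Set ((Int × Int) × Int)) kv =>
            if (kv.2, kv.1.2) ∈ st.2 then st
            else (PySem.List.pySetD st.1 kv.1.2 (PySem.List.pyGetD st.1 kv.1.2 0 + S.getD kv.2 0),
                  PySem.Set.add st.2 (kv.2, kv.1.2)))
          (ls, PySem.Set.ofList (P0.map (fun p => (v p, p.2)))))).1.length = m.toNat
      ∧ (∀ t : Nat, t < m.toNat →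
        (((P.map (fun p => (p, v p))).foldl
          (fun (st : List Int × PySem.Set ((Int × Int) × Int)) kv =>
            if (kv.2, kv.1.2) ∈ st.2 then st
            else (PySem.List.pySetD st.1 kv.1.2 (PySem.List.pyGetD st.1 kv.1.2 0 + S.getD kv.2 0),
                  PySem.Set.add st.2 (kv.2, kv.1.2)))
          (ls, PySem.Set.ofList (P0.map (fun p => (v p, p.2)))))).1.getD t 0
          = pvColSum S ((P0 ++ P).map (fun p => (v p, p.2))) ((t : Int))) := by
  intro P
  induction P with
  | nil =>
    intro P0 ls hlen _ hls
    refine ⟨by simp only [List.map_nil, List.foldl_nil]; exact hlen, ?_⟩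
    intro t ht
    simp only [List.map_nil, List.foldl_nil, List.append_nil]
    exact hls t ht
  | cons p P' ih =>
    intro P0 ls hlen hb hls
    have hbp := hb p List.mem_cons_self
    rw [List.map_cons, List.foldl_cons]
    by_cases hw : ((v p, p.2) : (Int × Int) × Int) ∈ PySem.Set.ofList (P0.map (fun p => (v p, p.2)))
    · rw [if_pos hw]
      have hofl : PySem.Set.ofList ((P0 ++ [p]).map (fun p => (v p, p.2)))
          = PySem.Set.ofList (P0.map (fun p => (v p, p.2))) := by
        rw [List.map_append, List.map_singleton, PySem.Set.ofList_append_singleton]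
        exact PySem.Set.add_of_mem hw
      have := ih (P0 ++ [p]) ls hlen (fun q hq => hb q (List.mem_cons_of_mem _ hq))
        (by
          intro t ht
          rw [hls t ht]
          unfold pvColSum
          rw [hofl])
      rw [hofl] at this
      obtain ⟨h1, h2⟩ := this
      refine ⟨h1, ?_⟩
      intro t ht
      rw [h2 t ht, List.append_assoc]
      rfl
    · rw [if_neg hw]
      have hofl : PySem.Set.ofList ((P0 ++ [p]).map (fun p => (v p, p.2)))
          = PySem.Set.ofList (P0.map (fun p => (v p, p.2))) ++ [(v p, p.2)] := by
        rw [List.map_append, List.map_singleton, PySem.Set.ofList_append_singleton]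
        exact PySem.Set.add_of_not_mem hw
      have hadd : PySem.Set.add (PySem.Set.ofList (P0.map (fun p => (v p, p.2)))) (v p, p.2)
          = PySem.Set.ofList ((P0 ++ [p]).map (fun p => (v p, p.2))) := by
        rw [hofl]
        exact PySem.Set.add_of_not_mem hw
      have hset : PySem.List.pySetD ls ((p.2 : Int)) (PySem.List.pyGetD ls ((p.2 : Int)) 0 + S.getD (v p) 0)
          = ls.set p.2.toNat (ls.getD p.2.toNat 0 + S.getD (v p) 0) := by
        rw [PySem.List.pySetD_of_nonneg _ _ hbp.1, PySem.List.pyGetD_of_nonneg _ _ hbp.1]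
      have hlen' : (PySem.List.pySetD ls ((p.2 : Int)) (PySem.List.pyGetD ls ((p.2 : Int)) 0 + S.getD (v p) 0)).length = m.toNat := by
        rw [hset, List.length_set, hlen]
      have hls' : ∀ t : Nat, t < m.toNat →
          (PySem.List.pySetD ls ((p.2 : Int)) (PySem.List.pyGetD ls ((p.2 : Int)) 0 + S.getD (v p) 0)).getD t 0
            = pvColSum S ((P0 ++ [p]).map (fun p => (v p, p.2))) ((t : Int)) := by
        intro t ht
        have hcs : pvColSum S ((P0 ++ [p]).map (fun p => (v p, p.2))) ((t : Int))
            = pvColSum S (P0.map (fun p => (v p, p.2))) ((t : Int))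
              + (if p.2 = ((t : Int)) then S.getD (v p) 0 else 0) := by
          unfold pvColSum
          rw [hofl, List.filter_append, List.map_append, List.sum_append]
          congr 1
          by_cases hc : p.2 = ((t : Int))
          · rw [List.filter_cons_of_pos (by simp [hc]), if_pos hc]
            simp
          · rw [List.filter_cons_of_neg (by simp [hc]), if_neg hc]
            simp
        rw [hcs, hset]
        by_cases hct : p.2 = ((t : Int))
        · have htn : t = p.2.toNat := by omega
          rw [if_pos hct, ← htn]
          rw [List.getD_eq_getElem?_getD, List.getElem?_set_self (by omega),
            Option.getD_some, htn, hls p.2.toNat (by omega)]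
        · have htn : p.2.toNat ≠ t := by omega
          rw [if_neg hct, getD_set_ne _ htn, hls t ht]
          omega
      have := ih (P0 ++ [p]) _ hlen' (fun q hq => hb q (List.mem_cons_of_mem _ hq)) hls'
      rw [hadd]
      obtain ⟨h1, h2⟩ := this
      refine ⟨h1, ?_⟩
      intro t ht
      rw [h2 t ht, List.append_assoc]
      rfl

theorem count_beq {α : Type} [inst : DecidableEq α] (b : BEq α) [hb : @LawfulBEq α b]
    (l : List α) (r : α) : @List.count α b r l = @List.count α instBEqOfDecidableEq r l := by
  induction l with
  | nil => rfl
  | cons a rest ih =>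
    rw [@List.count_cons α b, @List.count_cons α instBEqOfDecidableEq, ih]
    have hcond : (@BEq.beq α b a r) = (@BEq.beq α instBEqOfDecidableEq a r) := by
      by_cases h : a = r
      · subst h
        rw [@beq_self_eq_true α b _, @beq_self_eq_true α instBEqOfDecidableEq _]
      · rw [(@beq_eq_false_iff_ne α b hb a r).mpr h,
          (@beq_eq_false_iff_ne α instBEqOfDecidableEq _ a r).mpr h]
    rw [hcond]

theorem colSum_NT (n m : Int) (g0 : List (List Int)) (v : Int × Int → Int × Int)
    (hv : ∀ p q, p ∈ pvO n m g0 → q ∈ pvO n m g0 → (v p = v q ↔ pvReach n m g0 p q))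
    (S : PySem.Dict (Int × Int) Int)
    (hS : ∀ r, S.getD r 0 = ((((pvO n m g0).map v).count r : Nat) : Int)) (c : Int) :
    pvColSum S ((pvO n m g0).map (fun p => (v p, p.2))) c = pvNT n m g0 (pvO n m g0) c := by
  have htouch : ∀ p ∈ pvO n m g0,
      (pvTouch n m g0 p c ↔ ((v p, c) : (Int × Int) × Int) ∈ (pvO n m g0).map (fun q => (v q, q.2))) := by
    intro p hp
    constructor
    · rintro ⟨x, hr, hx⟩
      have hxO : x ∈ pvO n m g0 := by
        rcases reach_target hr with h | h
        · exact h ▸ hp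
        · exact mem_pvO.mpr h
      have hvx : v x = v p := ((hv p x hp hxO).mpr hr).symm
      exact List.mem_map.mpr ⟨x, hxO, by rw [hvx, hx]⟩
    · intro hmem
      obtain ⟨q, hq, he⟩ := List.mem_map.mp hmem
      have h1 : v q = v p := congrArg Prod.fst he
      have h2 : q.2 = c := congrArg Prod.snd he
      exact ⟨q, (hv p q hp hq).mp h1.symm, h2⟩
  unfold pvNT pvColSum
  have hSf : (((PySem.Set.ofList ((pvO n m g0).map (fun q => (v q, q.2)))).filter
      (fun rj => rj.2 == c))).Nodup := (PySem.Set.nodup_ofList _).filter _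
  have hstep : ((pvO n m g0).map (fun p => pvInd (pvTouch n m g0 p c)))
      = (pvO n m g0).map (fun p =>
          (((PySem.Set.ofList ((pvO n m g0).map (fun q => (v q, q.2)))).filter
            (fun rj => rj.2 == c)).map (fun w => pvInd (w.1 = v p))).sum) := by
    apply List.map_congr_left
    intro p hp
    rw [pvInd_congr (htouch p hp)]
    have hmem2 : (((v p, c) : (Int × Int) × Int) ∈ (pvO n m g0).map (fun q => (v q, q.2)))
        ↔ ((v p, c) : (Int × Int) × Int) ∈ ((PySem.Set.ofList ((pvO n m g0).map (fun q => (v q, q.2)))).filter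
            (fun rj => rj.2 == c)) := by
      rw [List.mem_filter, PySem.Set.mem_ofList]
      simp
    rw [pvInd_congr hmem2]
    rw [← sum_ind_mem _ hSf ((v p, c) : (Int × Int) × Int)]
    apply congrArg
    apply List.map_congr_left
    intro w hw
    apply pvInd_congr
    have hw2 : w.2 = c := by
      have := (List.mem_filter.mp hw).2
      simpa using this
    constructor
    · intro h
      rw [h]
    · intro h
      cases w
      simp at hw2 h ⊢
      exact ⟨h, hw2⟩
  rw [hstep, sum_swap_int]
  apply congrArg
  apply List.map_congr_left
  intro w _
  rw [sum_ind_count (pvO n m g0) v w.1, hS w.1]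
  exact congrArg (fun k : Nat => (k : Int)) (count_beq instBEqProd _ _)


-- proof-side names for the two ports' pipelines (definitionally equal to the ports' bodies)

def pvFinA (land : List (List Int)) : List (List Int) × List Int :=
  (PySem.List.pyRange 0 ((land.length : Int)) 1).foldl
    (fun st i => (PySem.List.pyRange 0 (((land.headI).length : Int)) 1).foldl
      (fun st j => pvCellA (land.length : Int) ((land.headI).length : Int) st i j) st)
    (land, List.replicate ((land.headI).length : Int).toNat 0)

def pvLab0 (land : List (List Int)) : PySem.Dict (Int × Int) (Int × Int) :=
  (PySem.List.pyRange 0 ((land.length : Int)) 1).foldl (fun d i =>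
      (PySem.List.pyRange 0 (((land.headI).length : Int)) 1).foldl
        (fun d j => if pvGet land i j = some 1 then d.insert (i, j) (i, j) else d) d)
    PySem.Dict.empty

def pvLabF (land : List (List Int)) : PySem.Dict (Int × Int) (Int × Int) :=
  (pvLab0 land).keys.foldl (fun lab p =>
    [(p.1, p.2 + 1), (p.1 + 1, p.2)].foldl (fun lab nb => pvUnionNb lab p nb) lab) (pvLab0 land)

def pvSizes (land : List (List Int)) : PySem.Dict (Int × Int) Int :=
  (pvLabF land).values.foldl (fun d r => d.insert r (d.getD r 0 + 1)) PySem.Dict.empty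

def pvFinB (land : List (List Int)) : List Int × PySem.Set ((Int × Int) × Int) :=
  (pvLabF land).items.foldl (fun (st : List Int × PySem.Set ((Int × Int) × Int)) kv =>
      if (kv.2, kv.1.2) ∈ st.2 then st
      else (PySem.List.pySetD st.1 kv.1.2 (PySem.List.pyGetD st.1 kv.1.2 0 +
              (pvSizes land).getD kv.2 0),
            PySem.Set.add st.2 (kv.2, kv.1.2)))
    (List.replicate ((land.headI).length : Int).toNat 0, PySem.Set.empty)

theorem solution_eq (land : List (List Int)) : solution land = solution_alt land := by
  obtain ⟨hALen, hALs⟩ := solutionA_char land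
  have hALen' : (pvFinA land).2.length = ((land.headI).length : Int).toNat := hALen
  have hALs' : ∀ t : Nat, t < ((land.headI).length : Int).toNat →
      (pvFinA land).2.getD t 0
        = pvNT (land.length : Int) ((land.headI).length : Int) land
            (pvO (land.length : Int) ((land.headI).length : Int) land) ((t : Int)) := hALs
  -- B side characterization
  have hlabel0 : (pvLab0 land).items
      = (pvO (land.length : Int) ((land.headI).length : Int) land).map (fun p => (p, p)) :=
    label0_char (land.length : Int) ((land.headI).length : Int) land
  have hOnd := nodup_pvO (land.length : Int) ((land.headI).length : Int) land
  have hbase : pvLabInv (pvO (land.length : Int) ((land.headI).length : Int) land) []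
      (pvLab0 land) (fun p => p) := by
    refine ⟨hlabel0, ?_⟩
    intro p q _ _
    rw [eqvGen_congr (R' := fun _ _ => False)
      (by intro a b; unfold pvERel; simp) p q, eqvGen_bot]
  have hkeys0 : (pvLab0 land).keys
      = pvO (land.length : Int) ((land.headI).length : Int) land :=
    keys_of_items _ _ _ hbase.1
  have hlabF : pvLabF land
      = (pvCand (pvO (land.length : Int) ((land.headI).length : Int) land)).foldl
          (fun lab e => pvUnionNb lab e.1 e.2) (pvLab0 land) := by
    unfold pvLabF
    rw [hkeys0, foldUnion_conv]
  obtain ⟨v, hinv⟩ := union_fold (pvO (land.length : Int) ((land.headI).length : Int) land)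
    hOnd (pvCand (pvO (land.length : Int) ((land.headI).length : Int) land)) [] (pvLab0 land)
    (fun p => p) (fun e he => (mem_pvCand.mp he).1) hbase
  rw [List.nil_append, ← hlabF] at hinv
  obtain ⟨hitems, hchar⟩ := hinv
  have hv : ∀ p q, p ∈ pvO (land.length : Int) ((land.headI).length : Int) land →
      q ∈ pvO (land.length : Int) ((land.headI).length : Int) land →
      (v p = v q ↔ pvReach (land.length : Int) ((land.headI).length : Int) land p q) := by
    intro p q hp hq
    rw [hchar p q hp hq]
    exact eqvGen_cand_iff_reach _ _ _ hp
  have hvals : (pvLabF land).values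
      = (pvO (land.length : Int) ((land.headI).length : Int) land).map v := by
    have h0 : (pvLabF land).values = (pvLabF land).items.map Prod.snd := rfl
    rw [h0, hitems, List.map_map]
    rfl
  have hS : ∀ r, (pvSizes land).getD r 0
      = ((((pvO (land.length : Int) ((land.headI).length : Int) land).map v).count r : Nat) : Int) := by
    intro r
    unfold pvSizes
    rw [hvals, PySem.Dict.getD_foldl_insert_add_one, PySem.Dict.getD_empty]
    omega
  have hbnd : ∀ p ∈ pvO (land.length : Int) ((land.headI).length : Int) land,
      0 ≤ p.2 ∧ p.2 < ((land.headI).length : Int) := by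
    intro p hp
    have := pvHot_ok (mem_pvO.mp hp)
    exact ⟨this.2.2.1, this.2.2.2.1⟩
  have hTot := foldTotals ((land.headI).length : Int) (pvSizes land) v
    (pvO (land.length : Int) ((land.headI).length : Int) land) []
    (List.replicate ((land.headI).length : Int).toNat 0)
    (List.length_replicate) hbnd
    (by
      intro t ht
      rw [List.getD_eq_getElem?_getD, List.getElem?_replicate, if_pos ht]
      rfl)
  have hBLen : (pvFinB land).1.length = ((land.headI).length : Int).toNat := by
    unfold pvFinB
    rw [hitems]
    exact hTot.1
  have hBLs : ∀ t : Nat, t < ((land.headI).length : Int).toNat →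
      (pvFinB land).1.getD t 0
        = pvNT (land.length : Int) ((land.headI).length : Int) land
            (pvO (land.length : Int) ((land.headI).length : Int) land) ((t : Int)) := by
    intro t ht
    have h1 : (pvFinB land).1.getD t 0
        = pvColSum (pvSizes land)
            ((pvO (land.length : Int) ((land.headI).length : Int) land).map (fun p => (v p, p.2)))
            ((t : Int)) := by
      unfold pvFinB
      rw [hitems]
      exact hTot.2 t ht
    rw [h1]
    exact colSum_NT (land.length : Int) ((land.headI).length : Int) land v hv (pvSizes land) hS _
  have hls : (pvFinA land).2 = (pvFinB land).1 := by
    apply List.ext_getElem (by rw [hALen', hBLen])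
    intro i h1 h2
    have hi : i < ((land.headI).length : Int).toNat := by rw [← hALen']; exact h1
    have e1 : (pvFinA land).2[i] = (pvFinA land).2.getD i 0 := by
      rw [List.getD_eq_getElem?_getD, List.getElem?_eq_getElem h1]
      rfl
    have e2 : (pvFinB land).1[i] = (pvFinB land).1.getD i 0 := by
      rw [List.getD_eq_getElem?_getD, List.getElem?_eq_getElem h2]
      rfl
    rw [e1, e2, hALs' i hi, hBLs i hi]
  show (PySem.List.max? (pvFinA land).2 (fun x => x)).getD 0
    = (PySem.List.max? (pvFinB land).1 (fun x => x)).getD 0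
  rw [hls]

-- ===== VERDICT (by name: the statement is the Claim_ definition above) =====
theorem solution_spec : Claim_equal_solution := by
  intro land _ _
  exact solution_eq land
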